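-- pv_equiv track=rewrite | github.com/mariia-rybakova/AlbumDesigner | src/core/spreads.py | partitions_with_swaps
-- ===== SOURCE A (Python) =====
-- from itertools import combinations, product, groupby, permutations
--
-- def partitions_with_swaps(seq, sizes, m):
--     """
--     Generate all partitions of `seq` into len(sizes) groups of given sizes.
--     Order inside a group doesn't affect the cost.
--     Cost = minimal #adjacent swaps needed to restore the default consecutive split,
--            which equals the number of inversions between group labels along the
--            original index order.
--
--     Returns: list of (groups, swaps) where groups is a list of lists of elements.
--     """
--     n = len(seq)
--     assert sum(sizes) == n, "sizes must sum to len(seq)"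
--     G = len(sizes)
--     indices = tuple(range(n))
--
--     # assignment over original positions: -1 = unassigned, else group id 0..G-1
--     assign = [-1] * n
--     assigned_positions = []  # list of positions already assigned
--     results = []
--
--     def add_inversions_for_new(pos, g):
--         """Count inversions introduced by assigning position `pos` -> group `g`,
--         against all previously assigned positions."""
--         inc = 0
--         for j in assigned_positions:
--             gj = assign[j]
--             if j < pos and gj > g:
--                 inc += 1
--             elif j > pos and g > gj:
--                 inc += 1
--         return inc
--
--     def backtrack(group_id, remaining_idx_set, swaps_so_far, groups_idx):
--         if swaps_so_far > m:
--             return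
--         if group_id == G:
--             # Build concrete groups (keep each group's indices in ascending original order)
--             groups = []
--             for gi, idxs in enumerate(groups_idx):
--                 groups.append([seq[i] for i in sorted(idxs)])
--             results.append((groups, swaps_so_far))
--             return
--
--         s = sizes[group_id]
--         rem_list = sorted(remaining_idx_set)
--         # choose s indices (as a set) for this group
--         for chosen in combinations(rem_list, s):
--             # assign them (order within chosen doesn't change cost since same label)
--             inc = 0
--             # assign one-by-one so we can update swaps incrementally
--             for pos in chosen:
--                 assign[pos] = group_id
--                 inc += add_inversions_for_new(pos, group_id)
--                 assigned_positions.append(pos)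
--
--             backtrack(
--                 group_id + 1,
--                 remaining_idx_set - set(chosen),
--                 swaps_so_far + inc,
--                 groups_idx + [chosen],
--             )
--
--             # undo
--             for pos in chosen:
--                 assigned_positions.pop()  # last appended
--                 assign[pos] = -1
--
--     backtrack(0, set(indices), 0, [])
--     # sort nicely (by swaps, then lexicographically)
--     results.sort(key=lambda x: (x[1], x[0]))
--     return results
-- ===== SOURCE B (Python) =====
-- def partitions_with_swaps(seq, sizes, m):
--     """
--     Same result as the backtracking version, but built from label sequences:
--     a partition into sized groups == a sequence assigning a group label to
--     every original position.  Enumerate the distinct label sequences directly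
--     (choose a label with remaining capacity at each position), count the
--     inversions of each sequence with a double loop, keep it iff <= m.
--     """
--     n = len(seq)
--     assert sum(sizes) == n, "sizes must sum to len(seq)"
--     G = len(sizes)
--
--     def label_seqs(rem, k):
--         """All length-k label sequences using at most rem[g] copies of g, lex order."""
--         if k == 0:
--             return [[]]
--         out = []
--         for g in range(G):
--             if rem[g] > 0:
--                 rem2 = list(rem)
--                 rem2[g] -= 1
--                 for tail in label_seqs(rem2, k - 1):
--                     out.append([g] + tail)
--         return out
--
--     def inversions(labels):
--         if not labels:
--             return 0
--         head, tail = labels[0], labels[1:]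
--         return sum(1 for y in tail if y < head) + inversions(tail)
--
--     results = []
--     for labels in label_seqs(list(sizes), n):
--         inv = inversions(labels)
--         if inv <= m:
--             groups = [[x for x, lab in zip(seq, labels) if lab == g] for g in range(G)]
--             results.append((groups, inv))
--     results.sort(key=lambda x: (x[1], x[0]))
--     return results
-- ===== Notes on version B (the rewrite author's own statement) =====
-- stated objective: alternative
-- what changed: Replaces the mutating backtracking over per-group index combinations (assign array, incremental inversion updates, pruning) with a direct enumeration of distinct group-label sequences under capacity constraints, a plain double-loop inversion count per sequence, and a filter inv<=m before the same final sort. Pre_ requires sum(sizes)==len(seq) (A asserts it) and, for m>=0, excludes negative size entries, on which A raises ValueError from combinations unless an oversized earlier group happens to cut the search first (A then returns []).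
-- outside the precondition, e.g. on partitions_with_swaps([0], [5, -4], 0): A returns [], B returns [([[0], []], 0)]
import Mathlib
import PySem

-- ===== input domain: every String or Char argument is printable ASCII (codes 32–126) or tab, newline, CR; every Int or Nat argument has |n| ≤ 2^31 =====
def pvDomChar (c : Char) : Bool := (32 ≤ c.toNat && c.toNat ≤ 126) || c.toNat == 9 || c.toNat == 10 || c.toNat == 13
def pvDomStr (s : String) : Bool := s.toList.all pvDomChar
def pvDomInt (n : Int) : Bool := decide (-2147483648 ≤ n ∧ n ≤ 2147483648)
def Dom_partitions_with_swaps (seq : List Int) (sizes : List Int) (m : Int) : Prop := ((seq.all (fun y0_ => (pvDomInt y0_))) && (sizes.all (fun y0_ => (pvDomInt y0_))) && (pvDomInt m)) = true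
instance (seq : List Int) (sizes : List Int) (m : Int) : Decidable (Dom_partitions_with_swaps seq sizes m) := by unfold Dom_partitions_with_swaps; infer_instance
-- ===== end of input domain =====

-- B replaces A's mutating backtracking over per-group index combinations by a direct
-- enumeration of distinct group-label sequences with a plain inversion count and filter;
-- same return value (return-value equivalence; neither mutates its arguments).

-- ===== PORT A =====

-- seq[i] for an index produced by range(n)/assigned positions: always in range on admitted inputs
def pwsGetD (xs : List Int) (i : Int) : Int := (PySem.List.pyGet? xs i).getD 0

-- add_inversions_for_new(pos, g): scan of assigned_positions against the assign array
def pwsAddInv (assign : List Int) (assigned : List Int) (pos g : Int) : Int :=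
  assigned.foldl (fun inc j =>
    let gj := pwsGetD assign j
    if j < pos ∧ gj > g then inc + 1
    else if j > pos ∧ g > gj then inc + 1 else inc) 0

-- the 'for pos in chosen' loop: state (assign, assigned_positions, inc)
def pwsAssignLoop (g : Int) (chosen : List Int) (assign assigned : List Int) :
    List Int × List Int × Int :=
  chosen.foldl (fun st pos =>
    let a := st.1.set pos.toNat g
    let inc' := st.2.2 + pwsAddInv a st.2.1 pos g
    (a, st.2.1 ++ [pos], inc')) (assign, assigned, 0)

-- backtrack(group_id, remaining_idx_set, swaps_so_far, groups_idx); recursion on the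
-- suffix of sizes (A indexes sizes by group_id and stops at G)
def pwsBacktrack (seq : List Int) (m : Int) (gs : List Int) (gid : Int)
    (remaining : List Int) (swaps : Int) (groupsIdx : List (List Int))
    (assign : List Int) (assigned : List Int) : List (List (List Int) × Int) :=
  if swaps > m then []
  else
    match gs with
    | [] =>
        [(groupsIdx.map (fun idxs =>
            (PySem.List.sorted idxs (fun x => x) false).map (fun i => pwsGetD seq i)), swaps)]
    | s :: rest =>
        let remList := PySem.List.sorted remaining (fun x => x) false
        (PySem.List.combinations remList s.toNat).foldl
          (fun acc chosen =>
            let st := pwsAssignLoop gid chosen assign assigned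
            acc ++ pwsBacktrack seq m rest (gid + 1) (PySem.Set.diff remaining chosen)
                    (swaps + st.2.2) (groupsIdx ++ [chosen]) st.1 st.2.1)
          []

def partitions_with_swaps (seq : List Int) (sizes : List Int) (m : Int) :
    List (List (List Int) × Int) :=
  let n := seq.length
  if sizes.sum = (n : Int) then
    PySem.List.sorted2
      (pwsBacktrack seq m sizes 0 (PySem.Set.ofList (PySem.List.pyRange 0 (n : Int) 1)) 0 []
        (List.replicate n (-1)) [])
      (fun x => x.2) (fun x => x.1) false
  else []  -- assert fails (AssertionError): outside Pre_

-- ===== PORT B =====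

-- label_seqs(rem, k): distinct length-k label sequences with capacities rem, lex order
def pwsLabelSeqs (G : Nat) (rem : List Int) (k : Nat) : List (List Int) :=
  match k with
  | 0 => [[]]
  | Nat.succ k' =>
      (List.range G).foldl (fun out (g : Nat) =>
        if pwsGetD rem (g : Int) > 0 then
          let rem2 := rem.set g (pwsGetD rem (g : Int) - 1)
          (pwsLabelSeqs G rem2 k').foldl (fun out2 tail => out2 ++ [(g : Int) :: tail]) out
        else out) []

-- inversions(labels): head against tail plus recursion
def pwsInversions : List Int → Int
  | [] => 0
  | x :: t => ((t.filter (fun y => y < x)).length : Int) + pwsInversions t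

-- [x for x, lab in zip(xs, labels) if lab == g]
def pwsSelect (xs labels : List Int) (g : Int) : List Int :=
  ((xs.zip labels).filter (fun p => p.2 == g)).map (fun p => p.1)

def partitions_with_swaps_alt (seq : List Int) (sizes : List Int) (m : Int) :
    List (List (List Int) × Int) :=
  let n := seq.length
  if sizes.sum = (n : Int) then
    let G := sizes.length
    let res := (pwsLabelSeqs G sizes n).foldl (fun acc labels =>
      let inv := pwsInversions labels
      if inv ≤ m then
        acc ++ [((List.range G).map (fun (g : Nat) => pwsSelect seq labels (g : Int)), inv)]
      else acc) []
    PySem.List.sorted2 res (fun x => x.2) (fun x => x.1) false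
  else []  -- assert fails: outside Pre_

-- ===== PRECONDITION & SPEC =====

-- Pre_ excludes inputs where sum(sizes) != len(seq) (A's assert raises) and, when m >= 0,
-- sizes with negative entries, on which A raises ValueError from combinations unless an
-- oversized earlier group happens to cut the search first (A then returns []).
def Pre_partitions_with_swaps (seq : List Int) (sizes : List Int) (m : Int) : Prop :=
  sizes.sum = (seq.length : Int) ∧ (m < 0 ∨ ∀ s ∈ sizes, 0 ≤ s)

instance (seq : List Int) (sizes : List Int) (m : Int) :
    Decidable (Pre_partitions_with_swaps seq sizes m) := by
  unfold Pre_partitions_with_swaps; infer_instance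

def pvWitness_partitions_with_swaps : List Int × List Int × Int := ([1, 2, 3], [1, 2], 1)

def Spec_partitions_with_swaps (seq : List Int) (sizes : List Int) (m : Int)
    (out : List (List (List Int) × Int)) : Prop :=
  out = partitions_with_swaps_alt seq sizes m

instance (seq : List Int) (sizes : List Int) (m : Int) (out : List (List (List Int) × Int)) :
    Decidable (Spec_partitions_with_swaps seq sizes m out) := by
  unfold Spec_partitions_with_swaps; infer_instance

-- ===== CLAIM (what is proved, stated in full; the proofs are below) =====
def Claim_equal_partitions_with_swaps : Prop :=
  ∀ (seq : List Int) (sizes : List Int) (m : Int),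
    Dom_partitions_with_swaps seq sizes m → Pre_partitions_with_swaps seq sizes m →
      Spec_partitions_with_swaps seq sizes m (partitions_with_swaps seq sizes m)

-- ===== LEMMAS AND PROOFS =====

-- proof-side defs
def pwsIncP (assigned chosen : List Int) : Int :=
  (chosen.map (fun p => (assigned.countP (fun j => decide (p < j)) : Int))).sum

def pwsBtP (seq : List Int) (m : Int) (gs : List Int) (rem : List Int) (swaps : Int)
    (gIdx : List (List Int)) : List (List (List Int) × Int) :=
  if swaps > m then []
  else
    match gs with
    | [] => [(gIdx.map (fun c => c.map (pwsGetD seq)), swaps)]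
    | s :: rest =>
        (PySem.List.combinations rem s.toNat).flatMap (fun c =>
          pwsBtP seq m rest (rem.filter (fun x => !c.contains x))
            (swaps + pwsIncP gIdx.flatten c) (gIdx ++ [c]))

theorem pwsGetD_nonneg_eq (xs : List Int) (j : Int) (h : 0 ≤ j) :
    pwsGetD xs j = (xs[j.toNat]?).getD 0 := by
  unfold pwsGetD
  have h3 := PySem.List.pyGet?_natCast xs j.toNat
  have h2 : ((j.toNat : Nat) : Int) = j := by omega
  rw [h2] at h3
  rw [h3]

theorem pwsGetD_set_ne (xs : List Int) (p : Int) (v : Int) (j : Int)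
    (hp : 0 ≤ p) (hj : 0 ≤ j) (hne : j ≠ p) :
    pwsGetD (xs.set p.toNat v) j = pwsGetD xs j := by
  rw [pwsGetD_nonneg_eq _ _ hj, pwsGetD_nonneg_eq _ _ hj,
    List.getElem?_set_ne (by omega)]

theorem pwsGetD_set_self (xs : List Int) (p : Int) (v : Int)
    (hp : 0 ≤ p) (hlt : p.toNat < xs.length) :
    pwsGetD (xs.set p.toNat v) p = v := by
  rw [pwsGetD_nonneg_eq _ _ hp, List.getElem?_set_self]
  · simp
  · exact hlt

theorem pwsAddInv_spec (assign : List Int) (oldA newA : List Int) (pos g : Int)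
    (hold : ∀ j ∈ oldA, 0 ≤ j ∧ j.toNat < assign.length ∧ pwsGetD assign j < g)
    (hnew : ∀ j ∈ newA, 0 ≤ j ∧ j.toNat < assign.length ∧ pwsGetD assign j = g) :
    pwsAddInv assign (oldA ++ newA) pos g =
      (oldA.countP (fun j => decide (pos < j)) : Int) := by
  show List.foldl (fun inc j =>
      if j < pos ∧ pwsGetD assign j > g then inc + 1
      else if j > pos ∧ g > pwsGetD assign j then inc + 1 else inc) 0 (oldA ++ newA) =
    (oldA.countP (fun j => decide (pos < j)) : Int)
  have step1 := PySem.List.foldl_congr_mem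
    (l := oldA ++ newA) (init := (0 : Int))
    (f := fun inc j =>
      if j < pos ∧ pwsGetD assign j > g then inc + 1
      else if j > pos ∧ g > pwsGetD assign j then inc + 1 else inc)
    (g := fun inc j => if pos < j ∧ pwsGetD assign j < g then inc + 1 else inc)
    (by
      intro acc j hj
      rcases List.mem_append.1 hj with hj | hj
      · have hv := (hold j hj).2.2
        by_cases hlt : pos < j
        · have h1 : ¬ (j < pos ∧ pwsGetD assign j > g) := by omega
          have h2 : j > pos ∧ g > pwsGetD assign j := by omega
          have h3 : pos < j ∧ pwsGetD assign j < g := by omega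
          simp only [h1, h2, if_neg, not_false_iff]
        · have h1 : ¬ (j < pos ∧ pwsGetD assign j > g) := by omega
          have h2 : ¬ (j > pos ∧ g > pwsGetD assign j) := by omega
          have h3 : ¬ (pos < j ∧ pwsGetD assign j < g) := by omega
          simp only [h1, h2, if_neg, not_false_iff]
      · have hv := (hnew j hj).2.2
        have h1 : ¬ (j < pos ∧ pwsGetD assign j > g) := by omega
        have h2 : ¬ (j > pos ∧ g > pwsGetD assign j) := by omega
        have h3 : ¬ (pos < j ∧ pwsGetD assign j < g) := by omega
        simp only [h1, h2, if_neg, not_false_iff])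
  rw [step1, PySem.List.foldl_ite_add_one, List.countP_append]
  have h1 : newA.countP (fun j => decide (pos < j ∧ pwsGetD assign j < g)) = 0 := by
    rw [List.countP_eq_zero]
    intro j hj
    have := (hnew j hj).2.2
    simp [this]
  have h2 : oldA.countP (fun j => decide (pos < j ∧ pwsGetD assign j < g)) =
      oldA.countP (fun j => decide (pos < j)) := by
    apply List.countP_congr
    intro j hj
    have := (hold j hj).2.2
    simp [this]
  rw [h1, h2]
  omega

theorem pwsIncP_cons (assigned : List Int) (p : Int) (c : List Int) :
    pwsIncP assigned (p :: c) =
      (assigned.countP (fun j => decide (p < j)) : Int) + pwsIncP assigned c := by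
  simp [pwsIncP]

theorem pws_assignLoop_spec (g : Int) (c : List Int) (assign oldA newA : List Int) (inc0 : Int)
    (hold : ∀ j ∈ oldA, 0 ≤ j ∧ j.toNat < assign.length ∧ pwsGetD assign j < g)
    (hnew : ∀ j ∈ newA, 0 ≤ j ∧ j.toNat < assign.length ∧ pwsGetD assign j = g)
    (hc : ∀ p ∈ c, 0 ≤ p ∧ p.toNat < assign.length ∧ p ∉ oldA ∧ p ∉ newA)
    (hcnd : c.Nodup) :
    ∃ A',
      c.foldl (fun st pos =>
        let a := st.1.set pos.toNat g
        let inc' := st.2.2 + pwsAddInv a st.2.1 pos g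
        (a, st.2.1 ++ [pos], inc')) (assign, oldA ++ newA, inc0) =
        (A', (oldA ++ newA) ++ c, inc0 + pwsIncP oldA c) ∧
      A'.length = assign.length ∧
      (∀ j ∈ oldA, pwsGetD A' j = pwsGetD assign j) ∧
      (∀ j ∈ newA ++ c, pwsGetD A' j = g) := by
  induction c generalizing assign newA inc0 with
  | nil =>
    refine ⟨assign, by simp [pwsIncP], rfl, fun j _ => rfl, ?_⟩
    intro j hj
    simp only [List.append_nil] at hj
    exact (hnew j hj).2.2
  | cons pos c' ih =>
    have hpos := hc pos (List.mem_cons_self)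
    have hposnn : 0 ≤ pos := hpos.1
    have hposlt : pos.toNat < assign.length := hpos.2.1
    set a1 := assign.set pos.toNat g with ha1
    have ha1len : a1.length = assign.length := by simp [ha1]
    have hkeep : ∀ j, 0 ≤ j → j ≠ pos → pwsGetD a1 j = pwsGetD assign j := by
      intro j hj hne
      exact pwsGetD_set_ne assign pos g j hposnn hj hne
    have hselfval : pwsGetD a1 pos = g := pwsGetD_set_self assign pos g hposnn hposlt
    have hold1 : ∀ j ∈ oldA, 0 ≤ j ∧ j.toNat < a1.length ∧ pwsGetD a1 j < g := by
      intro j hj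
      obtain ⟨h1, h2, h3⟩ := hold j hj
      have hne : j ≠ pos := fun h => hpos.2.2.1 (h ▸ hj)
      exact ⟨h1, by omega, (hkeep j h1 hne) ▸ h3⟩
    have hnew1 : ∀ j ∈ newA ++ [pos], 0 ≤ j ∧ j.toNat < a1.length ∧ pwsGetD a1 j = g := by
      intro j hj
      rcases List.mem_append.1 hj with hj | hj
      · obtain ⟨h1, h2, h3⟩ := hnew j hj
        have hne : j ≠ pos := fun h => hpos.2.2.2 (h ▸ hj)
        exact ⟨h1, by omega, (hkeep j h1 hne) ▸ h3⟩
      · rcases List.mem_singleton.1 hj with rfl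
        exact ⟨hposnn, by omega, hselfval⟩
    have hc1 : ∀ p ∈ c', 0 ≤ p ∧ p.toNat < a1.length ∧ p ∉ oldA ∧ p ∉ newA ++ [pos] := by
      intro p hp
      obtain ⟨h1, h2, h3, h4⟩ := hc p (List.mem_cons_of_mem _ hp)
      refine ⟨h1, by omega, h3, ?_⟩
      intro hmem
      rcases List.mem_append.1 hmem with hm | hm
      · exact h4 hm
      · rcases List.mem_singleton.1 hm with rfl
        exact (List.nodup_cons.1 hcnd).1 hp
    have hinc : pwsAddInv a1 (oldA ++ newA) pos g =
        (oldA.countP (fun j => decide (pos < j)) : Int) := by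
      apply pwsAddInv_spec
      · intro j hj
        obtain ⟨h1, h2, h3⟩ := hold1 j hj
        exact ⟨h1, by omega, h3⟩
      · intro j hj
        obtain ⟨h1, h2, h3⟩ := hnew1 j (List.mem_append_left _ hj)
        exact ⟨h1, by omega, h3⟩
    obtain ⟨A', hfold, hlen, holdv, hnewv⟩ :=
      ih a1 (newA ++ [pos]) (inc0 + (oldA.countP (fun j => decide (pos < j)) : Int))
        hold1 hnew1 hc1 (List.nodup_cons.1 hcnd).2
    refine ⟨A', ?_, by omega, ?_, ?_⟩
    · rw [List.foldl_cons]
      show List.foldl _ (a1, (oldA ++ newA) ++ [pos], inc0 + pwsAddInv a1 (oldA ++ newA) pos g) c' = _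
      rw [hinc]
      have hshape : oldA ++ newA ++ [pos] = oldA ++ (newA ++ [pos]) := by simp
      rw [hshape, hfold, pwsIncP_cons]
      simp only [Prod.mk.injEq]
      refine ⟨trivial, by simp, by omega⟩
    · intro j hj
      rw [holdv j hj]
      exact hkeep j (hold j hj).1 (fun h => hc pos List.mem_cons_self |>.2.2.1 (h ▸ hj))
    · intro j hj
      apply hnewv
      rcases List.mem_append.1 hj with h | h
      · exact List.mem_append_left _ (List.mem_append_left _ h)
      · rcases List.mem_cons.1 h with rfl | h
        · exact List.mem_append_left _ (List.mem_append_right _ (by simp))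
        · exact List.mem_append_right _ h

theorem pws_backtrack_eq_btP (seq : List Int) (m : Int) (gs : List Int) (gid : Int)
    (rem : List Int) (swaps : Int) (gIdx : List (List Int)) (assign assigned : List Int)
    (hassigned : assigned = gIdx.flatten)
    (hold : ∀ j ∈ assigned, 0 ≤ j ∧ j.toNat < assign.length ∧ pwsGetD assign j < gid)
    (hrem : rem.Pairwise (· < ·))
    (hremb : ∀ j ∈ rem, 0 ≤ j ∧ j.toNat < assign.length ∧ j ∉ assigned)
    (hgp : ∀ c ∈ gIdx, c.Pairwise (· < ·)) :
    pwsBacktrack seq m gs gid rem swaps gIdx assign assigned =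
      pwsBtP seq m gs rem swaps gIdx := by
  induction gs generalizing gid rem swaps gIdx assign assigned with
  | nil =>
    unfold pwsBacktrack pwsBtP
    by_cases hs : swaps > m
    · simp [hs]
    · simp only [hs, if_false]
      have : ∀ c ∈ gIdx, PySem.List.sorted c (fun x => x) false = c := by
        intro c hc
        exact PySem.List.sorted_eq_self_of_pairwise _ _ ((hgp c hc).imp le_of_lt)
      congr 1
      congr 1
      apply List.map_congr_left
      intro c hc
      rw [this c hc]
  | cons s rest ih =>
    subst hassigned
    unfold pwsBacktrack pwsBtP
    by_cases hs : swaps > m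
    · simp [hs]
    · simp only [hs, if_false]
      have hsortrem : PySem.List.sorted rem (fun x => x) false = rem :=
        PySem.List.sorted_eq_self_of_pairwise _ _ (hrem.imp le_of_lt)
    
      rw [hsortrem]
      refine Eq.trans (PySem.List.foldl_congr_mem _ _ (fun acc c =>
          acc ++ pwsBtP seq m rest (rem.filter (fun x => !c.contains x))
            (swaps + pwsIncP gIdx.flatten c) (gIdx ++ [c])) _ ?_) (by
        rw [PySem.List.foldl_append_eq_flatMap]
        simp)
      intro acc chosen hch
      obtain ⟨hsub, hlen⟩ := (PySem.List.mem_combinations_iff _ _ _).1 hch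
      have hchpw : chosen.Pairwise (· < ·) := hrem.sublist hsub
      have hchnd : chosen.Nodup := hchpw.imp ne_of_lt
      have hchsub : ∀ p ∈ chosen, p ∈ rem := fun p hp => hsub.mem hp
      obtain ⟨A', hfold, hA'len, holdv, hnewv⟩ :=
        pws_assignLoop_spec gid chosen assign gIdx.flatten [] 0
          hold (by intro j hj; cases hj)
          (by
            intro p hp
            obtain ⟨h1, h2, h3⟩ := hremb p (hchsub p hp)
            exact ⟨h1, h2, h3, by simp⟩)
          hchnd
      have hloop : pwsAssignLoop gid chosen assign gIdx.flatten =
          (A', gIdx.flatten ++ chosen, pwsIncP gIdx.flatten chosen) := by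
        unfold pwsAssignLoop
        have h0 : (assign, gIdx.flatten, (0:Int)) = (assign, gIdx.flatten ++ [], (0:Int)) := by simp
        rw [h0, hfold]
        simp
      rw [hloop]
      simp only
      congr 1
      have hdiff : PySem.Set.diff rem chosen = rem.filter (fun x => !chosen.contains x) := rfl
      rw [hdiff]
      apply ih
      · simp
      · intro j hj
        rcases List.mem_append.1 hj with hj | hj
        · obtain ⟨h1, h2, h3⟩ := hold j hj
          refine ⟨h1, by omega, ?_⟩
          have := holdv j hj
          omega
        · obtain ⟨h1, h2, h3⟩ := hremb j (hchsub j hj)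
          refine ⟨h1, by omega, ?_⟩
          have := hnewv j (by simpa using hj)
          omega
      · exact hrem.filter _
      · intro j hj
        have hjr := List.mem_of_mem_filter hj
        have hjf := List.of_mem_filter hj
        obtain ⟨h1, h2, h3⟩ := hremb j hjr
        refine ⟨h1, by omega, ?_⟩
        intro hmem
        rcases List.mem_append.1 hmem with hm | hm
        · exact h3 hm
        · simp at hjf
          exact hjf hm
      · intro c hc
        rcases List.mem_append.1 hc with hc | hc
        · exact hgp c hc
        · rcases List.mem_singleton.1 hc with rfl
          exact hchpw

def pwsEnum (rem : List Int) (gs : List Int) : List (List (List Int)) :=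
  match gs with
  | [] => [[]]
  | s :: rest =>
      (PySem.List.combinations rem s.toNat).flatMap (fun c =>
        (pwsEnum (rem.filter (fun x => !c.contains x)) rest).map (fun tl => c :: tl))

def pwsAddSw (assigned : List Int) (tl : List (List Int)) : Int :=
  match tl with
  | [] => 0
  | c :: r => pwsIncP assigned c + pwsAddSw (assigned ++ c) r

theorem pwsIncP_nonneg (assigned chosen : List Int) : 0 ≤ pwsIncP assigned chosen := by
  unfold pwsIncP
  apply List.sum_nonneg
  intro x hx
  obtain ⟨p, _, rfl⟩ := List.mem_map.1 hx
  positivity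

theorem pwsAddSw_nonneg (assigned : List Int) (tl : List (List Int)) :
    0 ≤ pwsAddSw assigned tl := by
  induction tl generalizing assigned with
  | nil => simp [pwsAddSw]
  | cons c r ih =>
    have h1 := pwsIncP_nonneg assigned c
    have h2 := ih (assigned ++ c)
    unfold pwsAddSw
    omega

theorem pws_btP_eq_filter_map (seq : List Int) (m : Int) (gs : List Int) (rem : List Int)
    (swaps : Int) (gIdx : List (List Int)) :
    pwsBtP seq m gs rem swaps gIdx =
      ((pwsEnum rem gs).filter (fun tl => decide (swaps + pwsAddSw gIdx.flatten tl ≤ m))).map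
        (fun tl => ((gIdx ++ tl).map (fun c => c.map (pwsGetD seq)),
                    swaps + pwsAddSw gIdx.flatten tl)) := by
  induction gs generalizing rem swaps gIdx with
  | nil =>
    unfold pwsBtP pwsEnum
    by_cases hs : swaps > m
    · have : ¬ (swaps + pwsAddSw gIdx.flatten [] ≤ m) := by simp [pwsAddSw]; omega
      simp [hs, this]
    · have h2 : swaps ≤ m := by omega
      simp [hs, h2, pwsAddSw]
  | cons s rest ih =>
    unfold pwsBtP pwsEnum
    by_cases hs : swaps > m
    · simp only [hs, if_true]
      symm
      rw [List.map_eq_nil_iff, List.filter_eq_nil_iff]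
      intro tl _
      have := pwsAddSw_nonneg gIdx.flatten tl
      simp only [decide_eq_true_eq]
      omega
    · simp only [hs, if_false]
      rw [List.filter_flatMap, List.map_flatMap]
      apply List.flatMap_congr
      intro c hc
      rw [ih, List.filter_map, List.map_map]
      have hfl : (gIdx ++ [c]).flatten = gIdx.flatten ++ c := by simp
      have hfilter : (pwsEnum (rem.filter (fun x => !c.contains x)) rest).filter
            (fun tl => decide (swaps + pwsIncP gIdx.flatten c + pwsAddSw (gIdx ++ [c]).flatten tl ≤ m)) =
          (pwsEnum (rem.filter (fun x => !c.contains x)) rest).filter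
            ((fun tl => decide (swaps + pwsAddSw gIdx.flatten tl ≤ m)) ∘ (fun tl => c :: tl)) := by
        apply List.filter_congr
        intro tl _
        simp only [Function.comp_apply, pwsAddSw, hfl, decide_eq_decide]
        omega
      rw [hfilter]
      apply List.map_congr_left
      intro tl _
      simp only [Function.comp_apply, pwsAddSw, hfl, Prod.mk.injEq]
      constructor
      · simp
      · omega

theorem pwsGetD_cons_succ (a : Int) (xs : List Int) (g : Nat) :
    pwsGetD (a :: xs) ((g : Int) + 1) = pwsGetD xs (g : Int) := by
  rw [pwsGetD_nonneg_eq _ _ (by omega), pwsGetD_nonneg_eq _ _ (by omega)]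
  have h1 : ((g : Int) + 1).toNat = g + 1 := by omega
  have h2 : ((g : Int)).toNat = g := by omega
  rw [h1, h2]
  simp

theorem pwsGetD_natCast (xs : List Int) (g : Nat) :
    pwsGetD xs (g : Int) = (xs[g]?).getD 0 := by
  rw [pwsGetD_nonneg_eq _ _ (by omega)]
  have h : ((g : Int)).toNat = g := by omega
  rw [h]

theorem pwsGetD_set_nat (xs : List Int) (g : Nat) (v : Int) (g' : Nat) :
    pwsGetD (xs.set g v) (g' : Int) =
      if g' = g ∧ g < xs.length then v else pwsGetD xs (g' : Int) := by
  rw [pwsGetD_natCast, pwsGetD_natCast, List.getElem?_set]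
  by_cases he : g = g'
  · subst he
    by_cases h2 : g < xs.length
    · rw [if_pos rfl, if_pos h2, if_pos ⟨rfl, h2⟩]
      simp
    · rw [if_pos rfl, if_neg h2, if_neg (by tauto)]
      rw [List.getElem?_eq_none_iff.2 (by omega : xs.length ≤ g)]
  · rw [if_neg he, if_neg (by tauto)]

theorem pwsLabelSeqs_succ (G : Nat) (cnt : List Int) (k : Nat) :
    pwsLabelSeqs G cnt (k + 1) = (List.range G).flatMap (fun (g : Nat) =>
      if pwsGetD cnt (g : Int) > 0 then
        (pwsLabelSeqs G (cnt.set g (pwsGetD cnt (g : Int) - 1)) k).map (fun t => (g : Int) :: t)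
      else []) := by
  show (List.range G).foldl (fun out (g : Nat) =>
      if pwsGetD cnt (g : Int) > 0 then
        (pwsLabelSeqs G (cnt.set g (pwsGetD cnt (g : Int) - 1)) k).foldl
          (fun out2 tail => out2 ++ [(g : Int) :: tail]) out
      else out) [] = _
  rw [PySem.List.foldl_congr_mem _ _ (fun out (g : Nat) =>
    out ++ (if pwsGetD cnt (g : Int) > 0 then
      (pwsLabelSeqs G (cnt.set g (pwsGetD cnt (g : Int) - 1)) k).map (fun t => (g : Int) :: t)
    else [])) _ ?_]
  · rw [PySem.List.foldl_append_eq_flatMap]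
    simp
  · intro acc g _
    by_cases h : pwsGetD cnt (g : Int) > 0
    · simp only [if_pos h]
      exact PySem.List.foldl_append_singleton_eq_map _ _ _
    · simp only [if_neg h, List.append_nil]

theorem pws_mem_labelSeqs (G : Nat) (k : Nat) (cnt : List Int) (l : List Int)
    (hG : cnt.length = G) (hpos : ∀ g : Nat, g < G → 0 ≤ pwsGetD cnt (g : Int)) :
    l ∈ pwsLabelSeqs G cnt k ↔
      l.length = k ∧ (∀ x ∈ l, ∃ g : Nat, g < G ∧ x = (g : Int)) ∧
        (∀ g : Nat, g < G → (l.count (g : Int) : Int) ≤ pwsGetD cnt (g : Int)) := by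
  induction k generalizing cnt l with
  | zero =>
    constructor
    · intro hl
      rcases List.mem_singleton.1 hl with rfl
      refine ⟨rfl, by simp, ?_⟩
      intro g hg
      simpa using hpos g hg
    · rintro ⟨hl, -, -⟩
      rw [List.length_eq_zero_iff] at hl
      simp [pwsLabelSeqs, hl]
  | succ k ih =>
    rw [pwsLabelSeqs_succ, List.mem_flatMap]
    constructor
    · rintro ⟨g, hg, hmem⟩
      rw [List.mem_range] at hg
      by_cases hc : pwsGetD cnt (g : Int) > 0
      · rw [if_pos hc] at hmem
        obtain ⟨t, ht, rfl⟩ := List.mem_map.1 hmem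
        set cnt' := cnt.set g (pwsGetD cnt (g : Int) - 1) with hcnt'
        have hG' : cnt'.length = G := by simp [hcnt', hG]
        have hpos' : ∀ g' : Nat, g' < G → 0 ≤ pwsGetD cnt' (g' : Int) := by
          intro g' hg'
          rw [hcnt', pwsGetD_set_nat]
          split
          · omega
          · exact hpos g' hg'
        obtain ⟨hlen, hlab, hcount⟩ := (ih cnt' t hG' hpos').1 ht
        refine ⟨by simp [hlen], ?_, ?_⟩
        · intro x hx
          rcases List.mem_cons.1 hx with rfl | hx
          · exact ⟨g, hg, rfl⟩
          · exact hlab x hx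
        · intro g' hg'
          have hcnt'val : pwsGetD cnt' (g' : Int) =
              if g' = g ∧ g < cnt.length then pwsGetD cnt (g : Int) - 1
              else pwsGetD cnt (g' : Int) := by
            rw [hcnt', pwsGetD_set_nat]
          have hco := hcount g' hg'
          rw [hcnt'val] at hco
          by_cases he : g' = g
          · subst he
            rw [List.count_cons_self]
            rw [if_pos ⟨rfl, by omega⟩] at hco
            push_cast
            omega
          · rw [List.count_cons_of_ne (by
              intro hcast
              exact he (by exact_mod_cast hcast.symm))]
            rw [if_neg (by tauto)] at hco
            exact hco
      · rw [if_neg hc] at hmem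
        cases hmem
    · rintro ⟨hlen, hlab, hcount⟩
      match l with
      | [] => simp at hlen
      | x :: t =>
        obtain ⟨g, hg, rfl⟩ := hlab x List.mem_cons_self
        refine ⟨g, List.mem_range.2 hg, ?_⟩
        have hcx : (1 : Int) ≤ pwsGetD cnt (g : Int) := by
          have := hcount g hg
          rw [List.count_cons_self] at this
          push_cast at this
          omega
        rw [if_pos (by omega)]
        apply List.mem_map.2
        refine ⟨t, ?_, rfl⟩
        set cnt' := cnt.set g (pwsGetD cnt (g : Int) - 1) with hcnt'
        have hG' : cnt'.length = G := by simp [hcnt', hG]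
        have hpos' : ∀ g' : Nat, g' < G → 0 ≤ pwsGetD cnt' (g' : Int) := by
          intro g' hg'
          rw [hcnt', pwsGetD_set_nat]
          split
          · omega
          · exact hpos g' hg'
        apply (ih cnt' t hG' hpos').2
        refine ⟨by simpa using hlen, fun x hx => hlab x (List.mem_cons_of_mem _ hx), ?_⟩
        intro g' hg'
        rw [hcnt', pwsGetD_set_nat]
        by_cases he : g' = g
        · subst he
          rw [if_pos ⟨rfl, by omega⟩]
          have := hcount g' hg'
          rw [List.count_cons_self] at this
          push_cast at this ⊢
          omega
        · rw [if_neg (by tauto)]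
          have := hcount g' hg'
          rw [List.count_cons_of_ne (by
            intro hcast
            exact he (by exact_mod_cast hcast.symm))] at this
          exact this

theorem pws_nodup_flatMap {γ β : Type} (gl : List γ) (f : γ → List β)
    (h1 : ∀ g ∈ gl, (f g).Nodup)
    (h2 : gl.Pairwise (fun a b => ∀ x ∈ f a, x ∉ f b)) : (gl.flatMap f).Nodup := by
  induction gl with
  | nil => simp
  | cons g t ih =>
    rw [List.flatMap_cons, List.nodup_append]
    rw [List.pairwise_cons] at h2
    refine ⟨h1 g List.mem_cons_self, ih (fun g' hg' => h1 g' (List.mem_cons_of_mem _ hg')) h2.2, ?_⟩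
    intro x hx b hb
    rintro rfl
    obtain ⟨g', hg', hxg'⟩ := List.mem_flatMap.1 hb
    exact h2.1 g' hg' x hx hxg'

theorem pws_nodup_labelSeqs (G : Nat) (k : Nat) (cnt : List Int) :
    (pwsLabelSeqs G cnt k).Nodup := by
  induction k generalizing cnt with
  | zero => simp [pwsLabelSeqs]
  | succ k ih =>
    rw [pwsLabelSeqs_succ]
    apply pws_nodup_flatMap
    · intro g _
      split
      · exact (ih _).map (fun a b h => by injection h)
      · simp
    · rw [List.pairwise_iff_getElem]
      intro i j hi hj hij x hx
      simp only [List.getElem_range] at hx ⊢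
      intro hx'
      have hxi : ∃ t, x = (i : Int) :: t := by
        by_cases h : pwsGetD cnt (i : Int) > 0
        · rw [if_pos h] at hx
          obtain ⟨t, _, rfl⟩ := List.mem_map.1 hx
          exact ⟨t, rfl⟩
        · rw [if_neg h] at hx
          cases hx
      have hxj : ∃ t, x = (j : Int) :: t := by
        by_cases h : pwsGetD cnt (j : Int) > 0
        · rw [if_pos h] at hx'
          obtain ⟨t, _, rfl⟩ := List.mem_map.1 hx'
          exact ⟨t, rfl⟩
        · rw [if_neg h] at hx'
          cases hx'
      obtain ⟨t1, rfl⟩ := hxi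
      obtain ⟨t2, he⟩ := hxj
      injection he with h1 _
      have : i = j := by exact_mod_cast h1
      omega

def pwsPartsOf (rem l : List Int) (G : Nat) : List (List Int) :=
  (List.range G).map (fun (g : Nat) => pwsSelect rem l (g : Int))

def pwsIsPartition (rem : List Int) (gs : List Int) (x : List (List Int)) : Prop :=
  match gs, x with
  | [], [] => True
  | [], _ :: _ => False
  | _ :: _, [] => False
  | s :: rest, c :: xr =>
      c.Sublist rem ∧ c.length = s.toNat ∧
        pwsIsPartition (rem.filter (fun a => !c.contains a)) rest xr

theorem pws_mem_enum (rem : List Int) (gs : List Int) (x : List (List Int)) :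
    x ∈ pwsEnum rem gs ↔ pwsIsPartition rem gs x := by
  induction gs generalizing rem x with
  | nil =>
    unfold pwsEnum pwsIsPartition
    cases x <;> simp
  | cons s rest ih =>
    unfold pwsEnum pwsIsPartition
    rw [List.mem_flatMap]
    constructor
    · rintro ⟨c, hc, hmem⟩
      obtain ⟨tl, htl, rfl⟩ := List.mem_map.1 hmem
      obtain ⟨hsub, hlen⟩ := (PySem.List.mem_combinations_iff _ _ _).1 hc
      exact ⟨hsub, hlen, (ih _ _).1 htl⟩
    · intro hp
      match x with
      | [] => cases hp
      | c :: xr =>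
        obtain ⟨hsub, hlen, hrec⟩ := hp
        exact ⟨c, (PySem.List.mem_combinations_iff _ _ _).2 ⟨hsub, hlen⟩,
          List.mem_map.2 ⟨xr, (ih _ _).2 hrec, rfl⟩⟩

theorem pws_nodup_combinations {α : Type} [DecidableEq α] (xs : List α) (hnd : xs.Nodup) (r : Nat) :
    (PySem.List.combinations xs r).Nodup := by
  induction xs generalizing r with
  | nil =>
    cases r
    · simp [PySem.List.combinations_zero]
    · simp [PySem.List.combinations_nil_succ]
  | cons a t ih =>
    cases r with
    | zero => simp [PySem.List.combinations_zero]
    | succ r =>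
      rw [PySem.List.combinations_cons_succ, List.nodup_append]
      rw [List.nodup_cons] at hnd
      refine ⟨(ih hnd.2 r).map (fun c1 c2 h => by injection h), ih hnd.2 (r + 1), ?_⟩
      intro c hc1 c' hc2
      obtain ⟨c0, _, rfl⟩ := List.mem_map.1 hc1
      rintro rfl
      have hsub := ((PySem.List.mem_combinations_iff _ _ _).1 hc2).1
      exact hnd.1 (hsub.mem List.mem_cons_self)

theorem pws_nodup_enum (rem : List Int) (hnd : rem.Nodup) (gs : List Int) :
    (pwsEnum rem gs).Nodup := by
  induction gs generalizing rem with
  | nil => simp [pwsEnum]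
  | cons s rest ih =>
    unfold pwsEnum
    apply pws_nodup_flatMap
    · intro c _
      exact (ih _ (hnd.filter _)).map (fun t1 t2 h => by injection h)
    · have hcnd := pws_nodup_combinations rem hnd s.toNat
      rw [List.pairwise_iff_forall_sublist]
      intro c c' hsub x hx hy
      obtain ⟨t1, _, rfl⟩ := List.mem_map.1 hx
      obtain ⟨t2, _, he⟩ := List.mem_map.1 hy
      injection he with h1 _
      subst h1
      have hnd2 := hsub.nodup hcnd
      simp at hnd2

theorem pwsSelect_nil_left (t : List Int) (g : Int) : pwsSelect [] t g = [] := by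
  simp [pwsSelect]

theorem pwsSelect_cons (p x : Int) (r t : List Int) (g : Int) :
    pwsSelect (p :: r) (x :: t) g =
      if x = g then p :: pwsSelect r t g else pwsSelect r t g := by
  by_cases h : x = g <;> simp [pwsSelect, h]

theorem pwsSelect_sublist (r t : List Int) (g : Int) : (pwsSelect r t g).Sublist r := by
  induction r generalizing t with
  | nil => simp [pwsSelect]
  | cons p r ih =>
    match t with
    | [] => simp [pwsSelect]
    | x :: t =>
      rw [pwsSelect_cons]
      split
      · exact (ih t).cons₂ p
      · exact (ih t).cons p

theorem pwsSelect_length (r t : List Int) (g : Int) (hlen : t.length = r.length) :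
    (pwsSelect r t g).length = t.count g := by
  induction r generalizing t with
  | nil =>
    obtain rfl : t = [] := List.length_eq_zero_iff.1 (by simpa using hlen)
    simp [pwsSelect]
  | cons p r ih =>
    match t with
    | x :: t =>
      rw [pwsSelect_cons]
      by_cases h : x = g
      · rw [if_pos h, List.length_cons, ih t (by simpa using hlen), h, List.count_cons_self]
      · rw [if_neg h, ih t (by simpa using hlen), List.count_cons_of_ne h]

def pwsReduce : List Int → List Int → List Int × List Int
  | p :: r, x :: t =>
      let pr := pwsReduce r t
      if x = 0 then pr else (p :: pr.1, (x - 1) :: pr.2)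
  | _, _ => ([], [])

theorem pwsReduce_fst_sublist (rem l : List Int) : (pwsReduce rem l).1.Sublist rem := by
  induction rem generalizing l with
  | nil => simp [pwsReduce]
  | cons p r ih =>
    match l with
    | [] => simp [pwsReduce]
    | x :: t =>
      unfold pwsReduce
      split
      · exact (ih t).cons p
      · exact (ih t).cons₂ p

theorem pwsReduce_len (rem l : List Int) (hlen : l.length = rem.length) :
    (pwsReduce rem l).2.length = (pwsReduce rem l).1.length := by
  induction rem generalizing l with
  | nil => simp [pwsReduce]
  | cons p r ih =>
    match l with
    | x :: t =>
      unfold pwsReduce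
      split
      · exact ih t (by simpa using hlen)
      · simpa using ih t (by simpa using hlen)

theorem pwsReduce_filter (rem l : List Int) (hnd : rem.Nodup) (hlen : l.length = rem.length) :
    rem.filter (fun a => !(pwsSelect rem l 0).contains a) = (pwsReduce rem l).1 := by
  induction rem generalizing l with
  | nil => cases l <;> simp [pwsReduce]
  | cons p r ih =>
    match l with
    | x :: t =>
      rw [List.nodup_cons] at hnd
      have hlent : t.length = r.length := by simpa using hlen
      have hfc : ∀ (c' : List Int), p ∉ c' →
          r.filter (fun a => !((if x = 0 then p :: c' else c') : List Int).contains a) =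
            r.filter (fun a => !c'.contains a) := by
        intro c' _
        apply List.filter_congr
        intro a ha
        have hap : a ≠ p := fun h => hnd.1 (h ▸ ha)
        split
        · simp [List.contains_eq_mem, hap]
        · rfl
      have hpnot : p ∉ pwsSelect r t 0 := fun h => hnd.1 ((pwsSelect_sublist r t 0).mem h)
      rw [pwsSelect_cons]
      by_cases hx : x = 0
      · rw [if_pos hx]
        unfold pwsReduce
        rw [if_pos hx]
        rw [List.filter_cons]
        have : (!((p :: pwsSelect r t 0).contains p)) = false := by
          simp [List.contains_eq_mem]
        rw [this]
        simp only [Bool.false_eq_true, if_false]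
        have := hfc (pwsSelect r t 0) hpnot
        rw [if_pos hx] at this
        rw [this, ih t hnd.2 hlent]
      · rw [if_neg hx]
        unfold pwsReduce
        rw [if_neg hx]
        rw [List.filter_cons]
        have : (!((pwsSelect r t 0).contains p)) = true := by
          simp [List.contains_eq_mem, hpnot]
        rw [this]
        simp only [if_true]
        rw [ih t hnd.2 hlent]

theorem pwsReduce_select (rem l : List Int) (h : Int) (hh : 0 ≤ h) :
    pwsSelect rem l (h + 1) = pwsSelect (pwsReduce rem l).1 (pwsReduce rem l).2 h := by
  induction rem generalizing l with
  | nil => simp [pwsReduce, pwsSelect]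
  | cons p r ih =>
    match l with
    | [] => simp [pwsReduce, pwsSelect]
    | x :: t =>
      rw [pwsSelect_cons]
      unfold pwsReduce
      by_cases hx : x = 0
      · rw [if_neg (by omega), if_pos hx]
        exact ih t
      · rw [if_neg hx]
        simp only
        rw [pwsSelect_cons]
        by_cases hxg : x = h + 1
        · rw [if_pos hxg, if_pos (by omega)]
          rw [ih t]
        · rw [if_neg hxg, if_neg (by omega)]
          exact ih t

theorem pwsReduce_count (rem l : List Int) (h : Int) (hh : 0 ≤ h) (hlen : l.length = rem.length) :
    (pwsReduce rem l).2.count h = l.count (h + 1) := by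
  induction rem generalizing l with
  | nil =>
    obtain rfl : l = [] := List.length_eq_zero_iff.1 (by simpa using hlen)
    simp [pwsReduce]
  | cons p r ih =>
    match l with
    | x :: t =>
      have hlent : t.length = r.length := by simpa using hlen
      unfold pwsReduce
      by_cases hx : x = 0
      · rw [if_pos hx, ih t hlent, List.count_cons_of_ne (by omega)]
      · rw [if_neg hx]
        simp only
        by_cases hxg : x = h + 1
        · have e1 : x - 1 = h := by omega
          rw [e1, hxg, List.count_cons_self, List.count_cons_self, ih t hlent]
        · rw [List.count_cons_of_ne (by omega), List.count_cons_of_ne (by omega), ih t hlent]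

theorem pwsReduce_labels (rem l : List Int) (y : Int) (hy : y ∈ (pwsReduce rem l).2) :
    ∃ x ∈ l, y = x - 1 ∧ x ≠ 0 := by
  induction rem generalizing l with
  | nil => simp [pwsReduce] at hy
  | cons p r ih =>
    match l with
    | [] => simp [pwsReduce] at hy
    | x :: t =>
      unfold pwsReduce at hy
      by_cases hx : x = 0
      · rw [if_pos hx] at hy
        obtain ⟨x', hx', hp⟩ := ih t hy
        exact ⟨x', List.mem_cons_of_mem _ hx', hp⟩
      · rw [if_neg hx] at hy
        simp only at hy
        rcases List.mem_cons.1 hy with rfl | hy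
        · exact ⟨x, List.mem_cons_self, rfl, hx⟩
        · obtain ⟨x', hx', hp⟩ := ih t hy
          exact ⟨x', List.mem_cons_of_mem _ hx', hp⟩

theorem pws_parts_isPartition (gs : List Int) (rem l : List Int) (hnd : rem.Nodup)
    (hlen : l.length = rem.length)
    (hlab : ∀ x ∈ l, ∃ g : Nat, g < gs.length ∧ x = (g : Int))
    (hcnt : ∀ g : Nat, g < gs.length → (l.count (g : Int) : Int) = pwsGetD gs (g : Int)) :
    pwsIsPartition rem gs (pwsPartsOf rem l gs.length) := by
  induction gs generalizing rem l with
  | nil =>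
    simp only [pwsPartsOf, List.length_nil, List.range_zero, List.map_nil]
    trivial
  | cons s rest ih =>
    unfold pwsPartsOf
    rw [show (s :: rest).length = rest.length + 1 from rfl, List.range_succ_eq_map,
      List.map_cons, List.map_map]
    show pwsIsPartition rem (s :: rest) _
    unfold pwsIsPartition
    refine ⟨pwsSelect_sublist _ _ _, ?_, ?_⟩
    · have h0 := hcnt 0 (by simp)
      have hget : pwsGetD (s :: rest) ((0 : Nat) : Int) = s := by
        rw [pwsGetD_natCast]; simp
      rw [pwsSelect_length _ _ _ hlen]
      rw [hget] at h0
      omega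
    · have hzero : ((0 : Nat) : Int) = (0 : Int) := by norm_num
      rw [hzero, pwsReduce_filter rem l hnd hlen]
      have hmap : (List.range rest.length).map ((fun g => pwsSelect rem l ((g : Nat) : Int)) ∘ Nat.succ) =
          pwsPartsOf (pwsReduce rem l).1 (pwsReduce rem l).2 rest.length := by
        unfold pwsPartsOf
        apply List.map_congr_left
        intro g _
        have hc : ((Nat.succ g : Nat) : Int) = (g : Int) + 1 := by push_cast; ring
        show pwsSelect rem l ((Nat.succ g : Nat) : Int) = _
        rw [hc, pwsReduce_select rem l g (by omega)]
      rw [hmap]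
      apply ih
      · exact (pwsReduce_fst_sublist rem l).nodup hnd
      · exact pwsReduce_len rem l hlen
      · intro y hy
        obtain ⟨x, hx, rfl, hx0⟩ := pwsReduce_labels rem l y hy
        obtain ⟨gx, hgx, rfl⟩ := hlab x hx
        have hgx0 : gx ≠ 0 := by
          intro h
          subst h
          simp at hx0
        have hgx' : gx < rest.length + 1 := by simpa using hgx
        refine ⟨gx - 1, by omega, by omega⟩
      · intro g hg
        rw [pwsReduce_count rem l (g : Int) (by omega) hlen]
        have := hcnt (g + 1) (by simp; omega)
        rw [show (((g + 1 : Nat)) : Int) = ((g : Int) + 1) from by push_cast; ring] at this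
        rw [this, pwsGetD_cons_succ]

def pwsMerge : List Int → List Int → List Int → List Int
  | [], _, _ => []
  | p :: r, c, l' =>
      if c.contains p then 0 :: pwsMerge r c l'
      else (l'.headD 0 + 1) :: pwsMerge r c l'.tail

theorem pwsMerge_length (rem c l' : List Int) : (pwsMerge rem c l').length = rem.length := by
  induction rem generalizing l' with
  | nil => simp [pwsMerge]
  | cons p r ih =>
    unfold pwsMerge
    split <;> simp [ih]

theorem pws_filter_sublist_eq (c rem : List Int) (hsub : c.Sublist rem) (hnd : rem.Nodup) :
    rem.filter (fun a => c.contains a) = c := by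
  induction rem generalizing c with
  | nil =>
    obtain rfl := List.sublist_nil.1 hsub
    simp
  | cons p r ih =>
    rw [List.nodup_cons] at hnd
    by_cases hm : p ∈ c
    · obtain ⟨c', rfl⟩ : ∃ c', c = p :: c' := by
        cases hsub with
        | cons _ htail => exact absurd (htail.mem hm) hnd.1
        | cons₂ _ h => exact ⟨_, rfl⟩
      have hc' : c'.Sublist r := by
        cases hsub with
        | cons _ h => exact List.sublist_of_cons_sublist h
        | cons₂ _ h => exact h
      rw [List.filter_cons]
      have hct : (p :: c').contains p = true := by simp [List.contains_eq_mem]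
      rw [hct]
      simp only [if_true]
      have hcongr : List.filter (fun a => (p :: c').contains a) r =
          List.filter (fun a => c'.contains a) r := by
        apply List.filter_congr
        intro a ha
        have hne : a ≠ p := fun h => hnd.1 (h ▸ ha)
        simp [List.contains_eq_mem, hne]
      rw [hcongr, ih c' hc' hnd.2]
    · have hc : c.Sublist r := by
        cases hsub with
        | cons _ h => exact h
        | cons₂ _ h => exact absurd List.mem_cons_self hm
      rw [List.filter_cons]
      have hct : c.contains p = false := by simp [List.contains_eq_mem, hm]
      rw [hct]
      simp only [Bool.false_eq_true, if_false]
      exact ih c hc hnd.2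

theorem pws_filter_not_length (c rem : List Int) (hsub : c.Sublist rem) (hnd : rem.Nodup) :
    (rem.filter (fun a => !c.contains a)).length = rem.length - c.length := by
  have h1 : rem.length = (rem.filter (fun a => c.contains a)).length +
      (rem.filter (fun a => !c.contains a)).length := by
    rw [← List.length_append]
    exact (List.Perm.length_eq (List.filter_append_perm _ rem)).symm
  rw [pws_filter_sublist_eq c rem hsub hnd] at h1
  omega

theorem pwsMerge_select0 (rem c l' : List Int) (hpos : ∀ y ∈ l', 0 ≤ y) :
    pwsSelect rem (pwsMerge rem c l') 0 = rem.filter (fun a => c.contains a) := by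
  induction rem generalizing l' with
  | nil => simp [pwsMerge, pwsSelect]
  | cons p r ih =>
    unfold pwsMerge
    by_cases hm : c.contains p = true
    · rw [if_pos hm, pwsSelect_cons, if_pos rfl, List.filter_cons, hm]
      simp only [if_true]
      rw [ih l' hpos]
    · have hm' : c.contains p = false := by simpa using hm
      rw [if_neg hm, pwsSelect_cons, List.filter_cons, hm']
      have hh : l'.headD 0 + 1 ≠ 0 := by
        have : 0 ≤ l'.headD 0 := by
          match l' with
          | [] => simp
          | y :: t => simpa using hpos y List.mem_cons_self
        omega
      rw [if_neg hh]
      simp only [Bool.false_eq_true, if_false]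
      exact ih l'.tail (fun y hy => hpos y (List.mem_of_mem_tail hy))

theorem pwsMerge_select_succ (rem c l' : List Int) (g : Nat)
    (hlen : l'.length = (rem.filter (fun a => !c.contains a)).length) :
    pwsSelect rem (pwsMerge rem c l') ((g : Int) + 1) =
      pwsSelect (rem.filter (fun a => !c.contains a)) l' (g : Int) := by
  induction rem generalizing l' with
  | nil => simp [pwsMerge, pwsSelect]
  | cons p r ih =>
    unfold pwsMerge
    by_cases hm : c.contains p = true
    · rw [if_pos hm, pwsSelect_cons, if_neg (by omega), List.filter_cons, hm]
      simp only [Bool.not_true, Bool.false_eq_true, if_false]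
      exact ih l' (by
        rw [List.filter_cons, hm] at hlen
        simpa using hlen)
    · have hm' : c.contains p = false := by simpa using hm
      rw [if_neg hm, pwsSelect_cons]
      rw [List.filter_cons, hm'] at hlen ⊢
      simp only [Bool.not_false, if_true] at hlen ⊢
      match l' with
      | [] => simp at hlen
      | y :: t =>
        simp only [List.headD_cons, List.tail_cons]
        rw [pwsSelect_cons]
        by_cases hy : y = (g : Int)
        · rw [if_pos (by omega), if_pos hy, ih t (by simpa using hlen)]
        · rw [if_neg (by omega), if_neg hy, ih t (by simpa using hlen)]

theorem pwsMerge_labels (rem c l' : List Int)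
    (hlen : l'.length = (rem.filter (fun a => !c.contains a)).length) (x : Int)
    (hx : x ∈ pwsMerge rem c l') : x = 0 ∨ ∃ y ∈ l', x = y + 1 := by
  induction rem generalizing l' with
  | nil => simp [pwsMerge] at hx
  | cons p r ih =>
    unfold pwsMerge at hx
    by_cases hm : c.contains p = true
    · rw [if_pos hm] at hx
      rw [List.filter_cons, hm] at hlen
      simp only [Bool.not_true, Bool.false_eq_true, if_false] at hlen
      rcases List.mem_cons.1 hx with rfl | hx
      · exact Or.inl rfl
      · exact ih l' hlen hx
    · have hm' : c.contains p = false := by simpa using hm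
      rw [if_neg hm] at hx
      rw [List.filter_cons, hm'] at hlen
      simp only [Bool.not_false, if_true, List.length_cons] at hlen
      match l', hlen with
      | y :: t, hlen =>
        simp only [List.headD_cons, List.tail_cons] at hx
        rcases List.mem_cons.1 hx with rfl | hx
        · exact Or.inr ⟨y, List.mem_cons_self, rfl⟩
        · rcases ih t (by simpa using hlen) hx with h | ⟨y', hy', hxy⟩
          · exact Or.inl h
          · exact Or.inr ⟨y', List.mem_cons_of_mem _ hy', hxy⟩

theorem pws_isPartition_labels (gs : List Int) (rem : List Int) (x : List (List Int))
    (hnd : rem.Nodup) (hp : pwsIsPartition rem gs x)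
    (hsz : ∀ s ∈ gs, 0 ≤ s) (hsum : gs.sum = (rem.length : Int)) :
    ∃ l, l.length = rem.length ∧
      (∀ y ∈ l, ∃ g : Nat, g < gs.length ∧ y = (g : Int)) ∧
      (∀ g : Nat, g < gs.length → (l.count (g : Int) : Int) ≤ pwsGetD gs (g : Int)) ∧
      pwsPartsOf rem l gs.length = x := by
  induction gs generalizing rem x with
  | nil =>
    match x, hp with
    | [], _ =>
      have : rem.length = 0 := by simpa using hsum.symm
      refine ⟨[], by simp [this], by simp, by simp, by simp [pwsPartsOf]⟩
  | cons s rest ih =>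
    match x, hp with
    | c :: xr, hp =>
      obtain ⟨hsub, hclen, hrec⟩ := hp
      set rem' := rem.filter (fun a => !c.contains a) with hrem'
      have hnd' : rem'.Nodup := hnd.filter _
      have hs0 : 0 ≤ s := hsz s List.mem_cons_self
      have hlen' : rem'.length = rem.length - c.length := pws_filter_not_length c rem hsub hnd
      have hclen_le : c.length ≤ rem.length := hsub.length_le
      have hsum' : rest.sum = (rem'.length : Int) := by
        have : (s :: rest).sum = s + rest.sum := by simp
        rw [this] at hsum
        have : (c.length : Int) = s := by
          rw [hclen]
          omega
        rw [hlen']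
        omega
      obtain ⟨l', hl'len, hl'lab, hl'cnt, hl'parts⟩ :=
        ih rem' xr hnd' hrec (fun s' hs' => hsz s' (List.mem_cons_of_mem _ hs')) hsum'
      have hl'pos : ∀ y ∈ l', 0 ≤ y := by
        intro y hy
        obtain ⟨g, _, rfl⟩ := hl'lab y hy
        omega
      refine ⟨pwsMerge rem c l', pwsMerge_length rem c l', ?_, ?_, ?_⟩
      · intro y hy
        rcases pwsMerge_labels rem c l' (hl'len.trans rfl) y hy with rfl | ⟨y', hy', rfl⟩
        · exact ⟨0, by simp, by norm_num⟩
        · obtain ⟨g, hg, rfl⟩ := hl'lab y' hy'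
          exact ⟨g + 1, by simpa using (by omega : g + 1 < rest.length + 1), by push_cast; ring⟩
      · intro g hg
        have hml : (pwsMerge rem c l').length = rem.length := pwsMerge_length rem c l'
        match g with
        | 0 =>
          have hsel := pwsMerge_select0 rem c l' hl'pos
          have hslen := pwsSelect_length rem (pwsMerge rem c l') 0 hml
          rw [show ((0 : Nat) : Int) = (0 : Int) from by norm_num]
          rw [← hslen, hsel, pws_filter_sublist_eq c rem hsub hnd]
          have : pwsGetD (s :: rest) (0 : Int) = s := by
            rw [show (0 : Int) = ((0 : Nat) : Int) from by norm_num, pwsGetD_natCast]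
            simp
          rw [this, hclen]
          omega
        | g + 1 =>
          have hsel := pwsMerge_select_succ rem c l' g hl'len
          have hslen := pwsSelect_length rem (pwsMerge rem c l') ((g : Int) + 1) hml
          have hslen' := pwsSelect_length rem' l' ((g : Int)) hl'len
          have hcast : (((g + 1 : Nat)) : Int) = (g : Int) + 1 := by push_cast; ring
          rw [hcast, ← hslen, hsel, hslen']
          rw [show pwsGetD (s :: rest) ((g : Int) + 1) = pwsGetD rest (g : Int) from
            pwsGetD_cons_succ s rest g]
          exact hl'cnt g (by simpa using hg)
      · unfold pwsPartsOf
        rw [show (s :: rest).length = rest.length + 1 from rfl, List.range_succ_eq_map,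
          List.map_cons, List.map_map]
        congr 1
        · rw [show ((0 : Nat) : Int) = (0 : Int) from by norm_num,
            pwsMerge_select0 rem c l' hl'pos, pws_filter_sublist_eq c rem hsub hnd]
        · rw [← hl'parts]
          unfold pwsPartsOf
          apply List.map_congr_left
          intro g _
          show pwsSelect rem (pwsMerge rem c l') ((Nat.succ g : Nat) : Int) = _
          rw [show ((Nat.succ g : Nat) : Int) = (g : Int) + 1 from by push_cast; ring,
            pwsMerge_select_succ rem c l' g hl'len]

theorem pws_parts_injOn (rem : List Int) (hnd : rem.Nodup) (G : Nat) (l1 l2 : List Int)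
    (h1 : l1.length = rem.length) (h2 : l2.length = rem.length)
    (hlab1 : ∀ x ∈ l1, ∃ g : Nat, g < G ∧ x = (g : Int))
    (hlab2 : ∀ x ∈ l2, ∃ g : Nat, g < G ∧ x = (g : Int))
    (heq : pwsPartsOf rem l1 G = pwsPartsOf rem l2 G) : l1 = l2 := by
  induction rem generalizing l1 l2 with
  | nil =>
    obtain rfl : l1 = [] := List.length_eq_zero_iff.1 (by simpa using h1)
    obtain rfl : l2 = [] := List.length_eq_zero_iff.1 (by simpa using h2)
    rfl
  | cons p r ih =>
    rw [List.nodup_cons] at hnd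
    match l1, l2 with
    | x :: t1, y :: t2 =>
      have hsel : ∀ g : Nat, g < G →
          pwsSelect (p :: r) (x :: t1) (g : Int) = pwsSelect (p :: r) (y :: t2) (g : Int) := by
        intro g hg
        have := (List.map_inj_left).1 heq g (List.mem_range.2 hg)
        exact this
      obtain ⟨gx, hgx, rfl⟩ := hlab1 x List.mem_cons_self
      obtain ⟨gy, hgy, rfl⟩ := hlab2 y List.mem_cons_self
      have hxy : (gy : Int) = (gx : Int) := by
        have h := hsel gx hgx
        rw [pwsSelect_cons, pwsSelect_cons, if_pos rfl] at h
        by_contra hne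
        rw [if_neg hne] at h
        have hpmem : p ∈ pwsSelect r t2 (gx : Int) := by
          rw [← h]
          exact List.mem_cons_self
        exact hnd.1 ((pwsSelect_sublist r t2 _).mem hpmem)
      have htails : ∀ g : Nat, g < G →
          pwsSelect r t1 (g : Int) = pwsSelect r t2 (g : Int) := by
        intro g hg
        have h := hsel g hg
        rw [pwsSelect_cons, pwsSelect_cons, hxy] at h
        by_cases hc : (gx : Int) = (g : Int)
        · rw [if_pos hc, if_pos hc] at h
          injection h
        · rw [if_neg hc, if_neg hc] at h
          exact h
      rw [hxy]
      congr 1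
      apply ih hnd.2 t1 t2 (by simpa using h1) (by simpa using h2)
        (fun x hx => hlab1 x (List.mem_cons_of_mem _ hx))
        (fun x hx => hlab2 x (List.mem_cons_of_mem _ hx))
      unfold pwsPartsOf
      apply List.map_congr_left
      intro g hg
      exact htails g (List.mem_range.1 hg)

theorem pws_sum_if (gx : Nat) (n : Nat) :
    ((List.range n).map (fun (g : Nat) => if (gx : Int) = (g : Int) then (1 : Int) else 0)).sum =
      if gx < n then 1 else 0 := by
  induction n with
  | zero => simp
  | succ n ih =>
    rw [List.range_succ, List.map_append, List.sum_append, ih]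
    simp only [List.map_cons, List.map_nil, List.sum_cons, List.sum_nil, add_zero]
    split_ifs <;> omega

theorem pws_sum_count (t : List Int) (n : Nat) (hpos : ∀ y ∈ t, 0 ≤ y) :
    ((List.range n).map (fun (g : Nat) => (t.count (g : Int) : Int))).sum =
      (t.countP (fun y => decide (y < (n : Int))) : Int) := by
  induction t with
  | nil => simp
  | cons y t ih =>
    have hy0 := hpos y List.mem_cons_self
    have ihh := ih (fun y hy => hpos y (List.mem_cons_of_mem _ hy))
    have hcnt : ∀ g : Nat, ((y :: t).count (g : Int) : Int) =
        (t.count (g : Int) : Int) + (if ((y.toNat : Nat) : Int) = (g : Int) then (1 : Int) else 0) := by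
      intro g
      by_cases h : y = (g : Int)
      · rw [h, List.count_cons_self, if_pos (by omega)]
        push_cast
        ring
      · rw [List.count_cons_of_ne h, if_neg (by omega)]
        ring
    calc ((List.range n).map (fun (g : Nat) => ((y :: t).count (g : Int) : Int))).sum
        = ((List.range n).map (fun (g : Nat) => (t.count (g : Int) : Int) +
            (if ((y.toNat : Nat) : Int) = (g : Int) then (1 : Int) else 0))).sum := by
          apply congrArg
          apply List.map_congr_left
          intro g _
          exact hcnt g
      _ = ((List.range n).map (fun (g : Nat) => (t.count (g : Int) : Int))).sum +
          ((List.range n).map (fun (g : Nat) =>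
            (if ((y.toNat : Nat) : Int) = (g : Int) then (1 : Int) else 0))).sum := by
          rw [← List.sum_map_add]
      _ = (t.countP (fun y => decide (y < (n : Int))) : Int) +
          (if y.toNat < n then 1 else 0) := by rw [ihh, pws_sum_if]
      _ = ((y :: t).countP (fun y => decide (y < (n : Int))) : Int) := by
          rw [List.countP_cons]
          push_cast
          by_cases h : y < (n : Int)
          · rw [if_pos (by omega : y.toNat < n)]
            simp [h]
          · rw [if_neg (by omega : ¬ y.toNat < n)]
            simp [h]

theorem pws_le_sum_eq (xs ys : List Int) (hlen : xs.length = ys.length)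
    (hle : ∀ i (h1 : i < xs.length) (h2 : i < ys.length), xs[i] ≤ ys[i])
    (hsum : xs.sum = ys.sum) : ∀ i (h1 : i < xs.length) (h2 : i < ys.length), xs[i] = ys[i] := by
  induction xs generalizing ys with
  | nil => intro i h1; simp at h1
  | cons x xs ih =>
    match ys with
    | y :: ys =>
      have hsumle : ∀ (as bs : List Int), as.length = bs.length →
          (∀ i (h1 : i < as.length) (h2 : i < bs.length), as[i] ≤ bs[i]) → as.sum ≤ bs.sum := by
        intro as
        induction as with
        | nil => intro bs h1 _; rw [List.length_eq_zero_iff.1 h1.symm]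
        | cons a as ihs =>
          intro bs hl hle2
          match bs with
          | b :: bs =>
            have h1 := hle2 0 (by simp) (by simp)
            have h2 := ihs bs (by simpa using hl) (fun i hi1 hi2 =>
              hle2 (i + 1) (by simpa using hi1) (by simpa using hi2))
            simp only [List.sum_cons]
            simp at h1
            omega
      have hx : x ≤ y := by simpa using hle 0 (by simp) (by simp)
      have htail_le : ∀ i (h1 : i < xs.length) (h2 : i < ys.length), xs[i] ≤ ys[i] := by
        intro i hi1 hi2
        simpa using hle (i + 1) (by simpa using hi1) (by simpa using hi2)
      have hts : xs.sum ≤ ys.sum := hsumle xs ys (by simpa using hlen) htail_le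
      have hxeq : x = y := by
        simp only [List.sum_cons] at hsum
        omega
      have htsum : xs.sum = ys.sum := by
        simp only [List.sum_cons] at hsum
        omega
      intro i h1 h2
      match i with
      | 0 => simpa using hxeq
      | i + 1 =>
        simpa using ih ys (by simpa using hlen) htail_le htsum i (by simpa using h1)
          (by simpa using h2)

theorem pwsGetD_mem (gs : List Int) (g : Nat) (hg : g < gs.length) :
    pwsGetD gs (g : Int) = gs[g] := by
  rw [pwsGetD_natCast, List.getElem?_eq_getElem hg]
  rfl

theorem pws_counts_exact (gs l : List Int) (_hsz : ∀ s ∈ gs, 0 ≤ s)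
    (hsum : gs.sum = (l.length : Int))
    (hlab : ∀ x ∈ l, ∃ g : Nat, g < gs.length ∧ x = (g : Int))
    (hcnt : ∀ g : Nat, g < gs.length → (l.count (g : Int) : Int) ≤ pwsGetD gs (g : Int)) :
    ∀ g : Nat, g < gs.length → (l.count (g : Int) : Int) = pwsGetD gs (g : Int) := by
  set cl := (List.range gs.length).map (fun (g : Nat) => (l.count (g : Int) : Int)) with hcl
  have hgl : (List.range gs.length).map (fun (g : Nat) => pwsGetD gs (g : Int)) = gs := by
    apply List.ext_getElem
    · simp
    · intro i h1 h2
      simp only [List.getElem_map, List.getElem_range]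
      exact pwsGetD_mem gs i h2
  have hcl_len : cl.length = gs.length := by simp [hcl]
  have hcl_le : ∀ i (h1 : i < cl.length) (h2 : i < gs.length), cl[i] ≤ gs[i] := by
    intro i h1 h2
    simp only [hcl, List.getElem_map, List.getElem_range]
    rw [← pwsGetD_mem gs i h2]
    exact hcnt i h2
  have hcl_sum : cl.sum = gs.sum := by
    rw [hcl, pws_sum_count l gs.length (by
      intro y hy
      obtain ⟨g, _, rfl⟩ := hlab y hy
      omega)]
    have : l.countP (fun y => decide (y < (gs.length : Int))) = l.length := by
      apply List.countP_eq_length.2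
      intro y hy
      obtain ⟨g, hg, rfl⟩ := hlab y hy
      simp
      omega
    rw [this, hsum]
  have := pws_le_sum_eq cl gs (by omega) hcl_le hcl_sum
  intro g hg
  have h := this g (by omega) hg
  simp only [hcl, List.getElem_map, List.getElem_range] at h
  rw [h, pwsGetD_mem gs g hg]

theorem pws_enum_perm (rem gs : List Int) (hnd : rem.Nodup)
    (hsz : ∀ s ∈ gs, 0 ≤ s) (hsum : gs.sum = (rem.length : Int)) :
    ((pwsLabelSeqs gs.length gs rem.length).map
      (fun l => pwsPartsOf rem l gs.length)).Perm (pwsEnum rem gs) := by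
  have hpos : ∀ g : Nat, g < gs.length → 0 ≤ pwsGetD gs (g : Int) := by
    intro g hg
    rw [pwsGetD_mem gs g hg]
    exact hsz _ (List.getElem_mem hg)
  have hchar := fun l => pws_mem_labelSeqs gs.length rem.length gs l rfl hpos
  apply List.Subperm.antisymm
  · apply List.subperm_of_subset
    · apply List.Nodup.map_on ?_ (pws_nodup_labelSeqs _ _ _)
      intro l1 h1 l2 h2 heq
      obtain ⟨ha1, hb1, _⟩ := (hchar l1).1 h1
      obtain ⟨ha2, hb2, _⟩ := (hchar l2).1 h2
      exact pws_parts_injOn rem hnd gs.length l1 l2 (by omega) (by omega) hb1 hb2 heq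
    · intro x hx
      obtain ⟨l, hl, rfl⟩ := List.mem_map.1 hx
      obtain ⟨ha, hb, hc⟩ := (hchar l).1 hl
      rw [pws_mem_enum]
      exact pws_parts_isPartition gs rem l hnd ha hb
        (pws_counts_exact gs l hsz (by rw [hsum, ha]) hb hc)
  · apply List.subperm_of_subset (pws_nodup_enum rem hnd gs)
    intro x hx
    rw [pws_mem_enum] at hx
    obtain ⟨l, ha, hb, hc, hparts⟩ := pws_isPartition_labels gs rem x hnd hx hsz hsum
    exact List.mem_map.2 ⟨l, (hchar l).2 ⟨ha, hb, hc⟩, hparts⟩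

theorem pws_select_map (xs l : List Int) (g : Int) (f : Int → Int) :
    (pwsSelect xs l g).map f = pwsSelect (xs.map f) l g := by
  induction xs generalizing l with
  | nil => simp [pwsSelect]
  | cons p r ih =>
    match l with
    | [] => simp [pwsSelect]
    | x :: t =>
      rw [List.map_cons, pwsSelect_cons, pwsSelect_cons]
      split
      · rw [List.map_cons, ih]
      · rw [ih]

theorem pws_pyRange0 (n : Nat) :
    PySem.List.pyRange 0 (n : Int) 1 = (List.range n).map (fun (i : Nat) => (i : Int)) := by
  unfold PySem.List.pyRange
  rw [if_neg (by norm_num)]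
  simp only
  have hcount : (if (0 : Int) < 1 then if (0 : Int) < (n : Int) then
      (((n : Int) - 0 + 1 - 1) / 1).toNat else 0 else
      if (n : Int) < 0 then (((0 : Int) - (n : Int) + -1 - 1) / -1).toNat else 0) = n := by
    rw [if_pos (by norm_num)]
    by_cases h : (0 : Int) < (n : Int)
    · rw [if_pos h]
      norm_num
    · rw [if_neg h]
      omega
  rw [hcount]
  apply List.map_congr_left
  intro i _
  omega

theorem pws_map_getD_range (seq : List Int) :
    ((List.range seq.length).map (fun (i : Nat) => (i : Int))).map (pwsGetD seq) = seq := by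
  rw [List.map_map]
  apply List.ext_getElem (by simp)
  intro i h1 h2
  simp only [List.getElem_map, List.getElem_range, Function.comp_apply]
  rw [pwsGetD_mem seq i h2]

theorem pwsIncP_nil_assigned (c : List Int) : pwsIncP [] c = 0 := by
  simp [pwsIncP]

theorem pwsIncP_append_assigned (a1 a2 c : List Int) :
    pwsIncP (a1 ++ a2) c = pwsIncP a1 c + pwsIncP a2 c := by
  unfold pwsIncP
  rw [← List.sum_map_add]
  apply congrArg
  apply List.map_congr_left
  intro p _
  rw [List.countP_append]
  push_cast
  ring

theorem pwsAddSw_append (a : List Int) (L1 L2 : List (List Int)) :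
    pwsAddSw a (L1 ++ L2) = pwsAddSw a L1 + pwsAddSw (a ++ L1.flatten) L2 := by
  induction L1 generalizing a with
  | nil => simp [pwsAddSw]
  | cons c r ih =>
    simp only [List.cons_append, pwsAddSw, List.flatten_cons]
    rw [ih]
    rw [List.append_assoc]
    ring

theorem pwsAddSw_shift (a : List Int) (L : List (List Int)) :
    pwsAddSw a L = pwsIncP a L.flatten + pwsAddSw [] L := by
  induction L generalizing a with
  | nil => simp [pwsAddSw, pwsIncP]
  | cons c r ih =>
    have h1 : pwsAddSw a (c :: r) = pwsIncP a c + pwsAddSw (a ++ c) r := rfl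
    have h2 : pwsAddSw [] (c :: r) = pwsIncP [] c + pwsAddSw ([] ++ c) r := rfl
    rw [h1, h2, ih (a ++ c), List.nil_append, ih c, pwsIncP_nil_assigned, List.flatten_cons,
      pwsIncP_append_assigned]
    have h3 : pwsIncP a (c ++ r.flatten) = pwsIncP a c + pwsIncP a r.flatten := by
      unfold pwsIncP
      rw [List.map_append, List.sum_append]
    rw [h3]
    ring

theorem pws_addSw_empties (a : List Int) (L : List (List Int)) (h : ∀ c ∈ L, c = []) :
    pwsAddSw a L = 0 := by
  induction L generalizing a with
  | nil => rfl
  | cons c r ih =>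
    have hc := h c List.mem_cons_self
    subst hc
    have h1 : pwsAddSw a ([] :: r) = pwsIncP a [] + pwsAddSw (a ++ []) r := rfl
    rw [h1, ih _ (fun c hc => h c (List.mem_cons_of_mem _ hc))]
    simp [pwsIncP]

theorem pwsIncP_singleton_lt (p : Int) (X : List Int) (h : ∀ q ∈ X, p < q) :
    pwsIncP [p] X = 0 := by
  unfold pwsIncP
  apply List.sum_eq_zero
  intro x hx
  obtain ⟨q, hq, rfl⟩ := List.mem_map.1 hx
  have : (List.countP (fun j => decide (q < j)) [p]) = 0 := by
    rw [List.countP_eq_zero]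
    intro j hj
    rcases List.mem_singleton.1 hj with rfl
    have := h q hq
    simp
    omega
  rw [this]
  rfl

theorem pws_addSw_parts (l : List Int) (rem : List Int) (G : Nat)
    (hrem : rem.Pairwise (· < ·)) (hlen : l.length = rem.length)
    (hlab : ∀ x ∈ l, ∃ g : Nat, g < G ∧ x = (g : Int)) :
    pwsAddSw [] (pwsPartsOf rem l G) = pwsInversions l := by
  induction l generalizing rem with
  | nil =>
    obtain rfl : rem = [] := List.length_eq_zero_iff.1 (by simpa using hlen.symm)
    rw [show pwsInversions [] = 0 from rfl]
    apply pws_addSw_empties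
    intro c hc
    obtain ⟨g, _, rfl⟩ := List.mem_map.1 hc
    exact pwsSelect_nil_left _ _
  | cons x t ih =>
    match rem with
    | p :: r =>
      have hlent : t.length = r.length := by simpa using hlen
      rw [List.pairwise_cons] at hrem
      obtain ⟨gx, hgx, rfl⟩ := hlab _ List.mem_cons_self
      obtain ⟨d, rfl⟩ : ∃ d, G = gx + 1 + d := ⟨G - gx - 1, by omega⟩
      have hlabt : ∀ x ∈ t, ∃ g : Nat, g < gx + 1 + d ∧ x = (g : Int) :=
        fun x hx => hlab x (List.mem_cons_of_mem _ hx)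
      -- decompose the parts of (p :: r, x :: t)
      set A1 := (List.range gx).map (fun (g : Nat) => pwsSelect r t (g : Int)) with hA1
      set cx := pwsSelect r t (gx : Int) with hcx
      set A2 := (List.range d).map
        (fun (e : Nat) => pwsSelect r t ((gx + 1 + e : Nat) : Int)) with hA2
      have hrangesplit : List.range (gx + 1 + d) =
          List.range gx ++ [gx] ++ (List.range d).map (fun e => gx + 1 + e) := by
        rw [List.range_add, List.range_succ]
      have hdecomp : pwsPartsOf (p :: r) ((gx : Int) :: t) (gx + 1 + d) =
          A1 ++ [(p :: cx)] ++ A2 := by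
        unfold pwsPartsOf
        rw [hrangesplit, List.map_append, List.map_append, List.map_map]
        congr 1
        · congr 1
          · apply List.map_congr_left
            intro g hg
            rw [pwsSelect_cons, if_neg (by
              have := List.mem_range.1 hg
              omega)]
          · simp only [List.map_cons, List.map_nil]
            rw [pwsSelect_cons, if_pos rfl]
        · apply List.map_congr_left
          intro e _
          simp only [Function.comp_apply]
          rw [pwsSelect_cons, if_neg (by push_cast; omega)]
      have hdecomp2 : pwsPartsOf r t (gx + 1 + d) = A1 ++ [cx] ++ A2 := by
        unfold pwsPartsOf
        rw [hrangesplit, List.map_append, List.map_append, List.map_map]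
        congr 1
      have hf1r : ∀ q ∈ A1.flatten, q ∈ r := by
        intro q hq
        obtain ⟨c, hc, hqc⟩ := List.mem_flatten.1 hq
        obtain ⟨g, _, rfl⟩ := List.mem_map.1 hc
        exact (pwsSelect_sublist r t _).mem hqc
      have hA2r : ∀ q ∈ A2.flatten, q ∈ r := by
        intro q hq
        obtain ⟨c, hc, hqc⟩ := List.mem_flatten.1 hq
        obtain ⟨g, _, rfl⟩ := List.mem_map.1 hc
        exact (pwsSelect_sublist r t _).mem hqc
      have hcxr : ∀ q ∈ cx, q ∈ r := fun q hq => (pwsSelect_sublist r t _).mem hq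
      -- both sides via the append decomposition
      have hcons : ∀ (f c : List Int) (R : List (List Int)),
          pwsAddSw f (c :: R) = pwsIncP f c + pwsAddSw (f ++ c) R := fun _ _ _ => rfl
      have hd1 : pwsPartsOf (p :: r) ((gx : Int) :: t) (gx + 1 + d) =
          A1 ++ ((p :: cx) :: A2) := by rw [hdecomp]; simp
      have hd2 : pwsPartsOf r t (gx + 1 + d) = A1 ++ (cx :: A2) := by rw [hdecomp2]; simp
      rw [hd1, pwsAddSw_append, List.nil_append, hcons]
      have hIH := ih r hrem.2 hlent hlabt
      rw [hd2, pwsAddSw_append, List.nil_append, hcons] at hIH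
      -- the two trailing addSw's agree
      have htrail : pwsAddSw (A1.flatten ++ (p :: cx)) A2 =
          pwsAddSw (A1.flatten ++ cx) A2 := by
        rw [pwsAddSw_shift, pwsAddSw_shift (A1.flatten ++ cx)]
        congr 1
        have e1 : A1.flatten ++ (p :: cx) = (A1.flatten ++ [p]) ++ cx := by simp
        rw [e1, pwsIncP_append_assigned, pwsIncP_append_assigned, pwsIncP_append_assigned]
        have : pwsIncP [p] A2.flatten = 0 := by
          apply pwsIncP_singleton_lt
          intro q hq
          exact hrem.1 q (hA2r q hq)
        omega
      -- the head-insertion contributes countP (p < ·) over A1.flatten = its length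
      have hins : pwsIncP A1.flatten (p :: cx) =
          (A1.flatten.length : Int) + pwsIncP A1.flatten cx := by
        rw [pwsIncP_cons]
        have : A1.flatten.countP (fun j => decide (p < j)) = A1.flatten.length := by
          apply List.countP_eq_length.2
          intro q hq
          simp only [decide_eq_true_eq]
          exact hrem.1 q (hf1r q hq)
        rw [this]
      -- A1.flatten.length = number of labels < gx in t
      have hflen : (A1.flatten.length : Int) = (t.countP (fun y => decide (y < (gx : Int))) : Int) := by
        rw [List.length_flatten]
        have hmap : A1.map List.length = (List.range gx).map (fun (g : Nat) => t.count (g : Int)) := by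
          rw [hA1, List.map_map]
          apply List.map_congr_left
          intro g _
          simp only [Function.comp_apply]
          exact pwsSelect_length r t (g : Int) hlent
        rw [hmap]
        rw [← pws_sum_count t gx (by
          intro y hy
          obtain ⟨g, _, rfl⟩ := hlabt y hy
          omega)]
        push_cast
        rw [List.map_map]
        apply congrArg
        apply List.map_congr_left
        intro g _
        rfl
      have hinv : pwsInversions ((gx : Int) :: t) =
          (t.countP (fun y => decide (y < (gx : Int))) : Int) + pwsInversions t := by
        show ((t.filter (fun y => y < (gx : Int))).length : Int) + pwsInversions t = _
        rw [List.countP_eq_length_filter]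
      rw [hinv, ← hIH, htrail, hins, hflen]
      ring

theorem pws_foldl_add_nodup (xs acc : List Int) (h : (acc ++ xs).Nodup) :
    xs.foldl PySem.Set.add acc = acc ++ xs := by
  induction xs generalizing acc with
  | nil => simp
  | cons x t ih =>
    rw [List.foldl_cons]
    have hxmem : x ∉ acc := by
      rw [List.nodup_append] at h
      exact fun hc => (h.2.2 x hc x List.mem_cons_self) rfl
    have hx : PySem.Set.add acc x = acc ++ [x] := by
      unfold PySem.Set.add
      simp [PySem.Set.contains, hxmem]
    rw [hx]
    rw [ih (acc ++ [x]) (by simpa using h)]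
    simp

theorem pws_ofList_nodup (xs : List Int) (h : xs.Nodup) : PySem.Set.ofList xs = xs := by
  rw [PySem.Set.ofList_eq_foldl]
  simpa using pws_foldl_add_nodup xs [] (by simpa using h)

def pwsBf (a b : List (List Int) × Int) : Bool :=
  decide (a.2 < b.2) || (!decide (b.2 < a.2) && decide (a.1 < b.1))

def pwsLe (a b : List (List Int) × Int) : Prop := pwsBf b a = false

theorem pws_sorted2_eq (xs : List (List (List Int) × Int)) :
    PySem.List.sorted2 xs (fun x => x.2) (fun x => x.1) false =
      xs.foldl (fun acc x => PySem.List.insertBy pwsBf x acc) [] := rfl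

theorem pwsBf_true_iff (a b : List (List Int) × Int) :
    pwsBf a b = true ↔ (a.2 < b.2 ∨ (¬ b.2 < a.2 ∧ a.1 < b.1)) := by
  simp [pwsBf]

theorem pwsLe_iff (a b : List (List Int) × Int) :
    pwsLe a b ↔ a.2 < b.2 ∨ (a.2 = b.2 ∧ a.1 ≤ b.1) := by
  unfold pwsLe
  rw [Bool.eq_false_iff, Ne, pwsBf_true_iff, not_or, not_and_or]
  constructor
  · rintro ⟨h1, h2 | h2⟩
    · rw [not_not] at h2
      exact Or.inl h2
    · rcases lt_trichotomy a.2 b.2 with h | h | h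
      · exact Or.inl h
      · exact Or.inr ⟨h, not_lt.1 h2⟩
      · exact absurd h h1
  · rintro (h | ⟨h1, h2⟩)
    · exact ⟨by omega, Or.inl (by rw [not_not]; exact h)⟩
    · exact ⟨by omega, Or.inr (not_lt.2 h2)⟩

theorem pwsLe_trans (a b c : List (List Int) × Int) (h1 : pwsLe a b) (h2 : pwsLe b c) :
    pwsLe a c := by
  rw [pwsLe_iff] at *
  rcases h1 with h1 | ⟨h1e, h1l⟩ <;> rcases h2 with h2 | ⟨h2e, h2l⟩
  · exact Or.inl (lt_trans h1 h2)
  · exact Or.inl (by omega)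
  · exact Or.inl (by omega)
  · exact Or.inr ⟨by omega, le_trans h1l h2l⟩

theorem pwsLe_antisymm (a b : List (List Int) × Int) (h1 : pwsLe a b) (h2 : pwsLe b a) :
    a = b := by
  rw [pwsLe_iff] at *
  rcases h1 with h1 | ⟨h1e, h1l⟩ <;> rcases h2 with h2 | ⟨h2e, h2l⟩ <;> try omega
  exact Prod.ext (le_antisymm h1l h2l) h1e

theorem pws_insertBy_pairwise (x : List (List Int) × Int) (l : List (List (List Int) × Int))
    (h : l.Pairwise pwsLe) : (PySem.List.insertBy pwsBf x l).Pairwise pwsLe := by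
  induction l with
  | nil => simp [PySem.List.insertBy]
  | cons y ys ih =>
    rw [List.pairwise_cons] at h
    by_cases hb : pwsBf x y = true
    · have he : PySem.List.insertBy pwsBf x (y :: ys) = x :: y :: ys := by
        simp [PySem.List.insertBy, hb]
      rw [he]
      have hxy : pwsLe x y := by
        rw [pwsLe_iff]
        rw [pwsBf_true_iff] at hb
        rcases hb with h' | ⟨h1, h2⟩
        · exact Or.inl h'
        · rcases lt_trichotomy x.2 y.2 with h' | h' | h'
          · exact Or.inl h'
          · exact Or.inr ⟨h', le_of_lt h2⟩
          · exact absurd h' h1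
      refine List.pairwise_cons.2 ⟨?_, List.pairwise_cons.2 ⟨h.1, h.2⟩⟩
      intro z hz
      rw [List.mem_cons] at hz
      rcases hz with h' | hz
      · exact h' ▸ hxy
      · exact pwsLe_trans _ _ _ hxy (h.1 z hz)
    · have he : PySem.List.insertBy pwsBf x (y :: ys) = y :: PySem.List.insertBy pwsBf x ys := by
        simp [PySem.List.insertBy, hb]
      rw [he]
      refine List.pairwise_cons.2 ⟨?_, ih h.2⟩
      intro z hz
      rw [PySem.List.mem_insertBy] at hz
      rcases hz with h' | hz
      · subst h'
        show pwsBf z y = false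
        simpa using hb
      · exact h.1 z hz

theorem pws_foldl_pairwise (xs acc : List (List (List Int) × Int)) (h : acc.Pairwise pwsLe) :
    (xs.foldl (fun acc x => PySem.List.insertBy pwsBf x acc) acc).Pairwise pwsLe := by
  induction xs generalizing acc with
  | nil => exact h
  | cons x t ih => exact ih _ (pws_insertBy_pairwise x acc h)

theorem pws_sorted2_pairwise (xs : List (List (List Int) × Int)) :
    (PySem.List.sorted2 xs (fun x => x.2) (fun x => x.1) false).Pairwise pwsLe := by
  rw [pws_sorted2_eq]
  exact pws_foldl_pairwise xs [] (by simp)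

theorem pws_sorted2_congr (xs ys : List (List (List Int) × Int)) (h : xs.Perm ys) :
    PySem.List.sorted2 xs (fun x => x.2) (fun x => x.1) false =
    PySem.List.sorted2 ys (fun x => x.2) (fun x => x.1) false := by
  refine List.Perm.eq_of_pairwise (fun a b _ _ h1 h2 => pwsLe_antisymm a b h1 h2)
    (pws_sorted2_pairwise xs) (pws_sorted2_pairwise ys) ?_
  exact ((PySem.List.sorted2_perm xs _ _ _).trans h).trans (PySem.List.sorted2_perm ys _ _ _).symm

theorem pws_main (seq sizes : List Int) (m : Int)
    (h1 : sizes.sum = (seq.length : Int)) (h2 : ∀ s ∈ sizes, 0 ≤ s) :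
    partitions_with_swaps seq sizes m = partitions_with_swaps_alt seq sizes m := by
  unfold partitions_with_swaps partitions_with_swaps_alt
  simp only [if_pos h1]
  set n := seq.length with hn
  set G := sizes.length with hG
  set R := (List.range n).map (fun (i : Nat) => (i : Int)) with hR
  have hRnodup : R.Nodup := by
    rw [hR]
    exact (List.nodup_range).map (fun a b hab => by exact_mod_cast hab)
  have hRpw : R.Pairwise (· < ·) := by
    rw [hR]
    apply List.Pairwise.map
    · intro a b hab
      exact_mod_cast hab
    · exact List.pairwise_lt_range
  have hRlen : R.length = n := by simp [hR]
  have hrem0 : PySem.Set.ofList (PySem.List.pyRange 0 (n : Int) 1) = R := by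
    rw [pws_pyRange0, ← hR, pws_ofList_nodup R hRnodup]
  rw [hrem0]
  -- A side: backtrack -> pure -> filter/map over the enumeration
  have hbt : pwsBacktrack seq m sizes 0 R 0 [] (List.replicate n (-1)) [] =
      pwsBtP seq m sizes R 0 [] := by
    apply pws_backtrack_eq_btP
    · simp
    · intro j hj
      cases hj
    · exact hRpw
    · intro j hj
      rw [hR] at hj
      obtain ⟨i, hi, rfl⟩ := List.mem_map.1 hj
      have := List.mem_range.1 hi
      refine ⟨by omega, by simpa using (by omega : i < n), by simp⟩
    · intro c hc
      cases hc
  rw [hbt, pws_btP_eq_filter_map]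
  -- B side: the foldl is a filter/map
  have hfold : (pwsLabelSeqs G sizes n).foldl (fun acc labels =>
      let inv := pwsInversions labels
      if inv ≤ m then
        acc ++ [((List.range G).map (fun (g : Nat) => pwsSelect seq labels (g : Int)), inv)]
      else acc) [] =
      ((pwsLabelSeqs G sizes n).filter (fun l => decide (pwsInversions l ≤ m))).map
        (fun l => ((List.range G).map (fun (g : Nat) => pwsSelect seq l (g : Int)),
          pwsInversions l)) := by
    rw [PySem.List.foldl_append_ite (p := fun l => pwsInversions l ≤ m)
      (f := fun l => ((List.range G).map (fun (g : Nat) => pwsSelect seq l (g : Int)),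
        pwsInversions l))]
    simp
  rw [hfold]
  -- the permutation between the two enumerations
  have hperm := pws_enum_perm R sizes hRnodup h2 (by rw [hRlen]; exact h1)
  apply pws_sorted2_congr
  have hmemfacts : ∀ l ∈ pwsLabelSeqs G sizes n,
      l.length = n ∧ (∀ x ∈ l, ∃ g : Nat, g < G ∧ x = (g : Int)) := by
    intro l hl
    have hpos : ∀ g : Nat, g < sizes.length → 0 ≤ pwsGetD sizes (g : Int) := by
      intro g hg
      rw [pwsGetD_mem sizes g hg]
      exact h2 _ (List.getElem_mem hg)
    obtain ⟨ha, hb, _⟩ := (pws_mem_labelSeqs sizes.length n sizes l rfl hpos).1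
      (by rw [← hG]; exact hl)
    exact ⟨ha, hb⟩
  -- pointwise equalities on members
  have hq : ∀ l ∈ pwsLabelSeqs G sizes n,
      pwsAddSw [] (pwsPartsOf R l G) = pwsInversions l := by
    intro l hl
    obtain ⟨ha, hb⟩ := hmemfacts l hl
    exact pws_addSw_parts l R G hRpw (by omega) hb
  have hgroups : ∀ l ∈ pwsLabelSeqs G sizes n,
      (pwsPartsOf R l G).map (fun c => c.map (pwsGetD seq)) =
        (List.range G).map (fun (g : Nat) => pwsSelect seq l (g : Int)) := by
    intro l hl
    unfold pwsPartsOf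
    rw [List.map_map]
    apply List.map_congr_left
    intro g _
    show (pwsSelect R l (g : Int)).map (pwsGetD seq) = _
    rw [pws_select_map, hR, pws_map_getD_range seq]
  -- chain the permutation through
  refine List.Perm.trans ?_ (List.Perm.refl _)
  have hstep : ((pwsEnum R sizes).filter
        (fun tl => decide (0 + pwsAddSw (List.flatten ([] : List (List Int))) tl ≤ m))).map
      (fun tl => ((([] : List (List Int)) ++ tl).map (fun c => c.map (pwsGetD seq)),
        0 + pwsAddSw (List.flatten ([] : List (List Int))) tl)) =
      ((pwsEnum R sizes).filter (fun tl => decide (pwsAddSw [] tl ≤ m))).map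
      (fun tl => (tl.map (fun c => c.map (pwsGetD seq)), pwsAddSw [] tl)) := by
    simp only [List.flatten_nil, List.nil_append, zero_add]
  rw [hstep]
  have hperm2 := ((hperm.symm).filter (fun tl => decide (pwsAddSw [] tl ≤ m))).map
    (fun tl => (tl.map (fun c => c.map (pwsGetD seq)), pwsAddSw [] tl))
  refine hperm2.trans ?_
  rw [List.filter_map, List.map_map, hRlen, ← hG]
  have hfc : (pwsLabelSeqs G sizes n).filter
      ((fun tl => decide (pwsAddSw [] tl ≤ m)) ∘ (fun l => pwsPartsOf R l G)) =
      (pwsLabelSeqs G sizes n).filter (fun l => decide (pwsInversions l ≤ m)) := by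
    apply List.filter_congr
    intro l hl
    simp only [Function.comp_apply]
    rw [hq l hl]
  rw [hfc]
  apply List.Perm.of_eq
  apply List.map_congr_left
  intro l hl
  have hl' : l ∈ pwsLabelSeqs G sizes n := List.mem_of_mem_filter hl
  simp only [Function.comp_apply]
  rw [hq l hl', hgroups l hl']

theorem pwsInversions_nonneg (l : List Int) : 0 ≤ pwsInversions l := by
  induction l with
  | nil => simp [pwsInversions]
  | cons x t ih =>
    have : (0 : Int) ≤ ((t.filter (fun y => y < x)).length : Int) := by positivity
    unfold pwsInversions
    omega

theorem pws_main_neg (seq sizes : List Int) (m : Int)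
    (h1 : sizes.sum = (seq.length : Int)) (hm : m < 0) :
    partitions_with_swaps seq sizes m = partitions_with_swaps_alt seq sizes m := by
  unfold partitions_with_swaps partitions_with_swaps_alt
  simp only [if_pos h1]
  have hA : pwsBacktrack seq m sizes 0
      (PySem.Set.ofList (PySem.List.pyRange 0 (seq.length : Int) 1)) 0 []
      (List.replicate seq.length (-1)) [] = [] := by
    unfold pwsBacktrack
    rw [if_pos (by omega : (0 : Int) > m)]
  have hB : (pwsLabelSeqs sizes.length sizes seq.length).foldl (fun acc labels =>
      let inv := pwsInversions labels
      if inv ≤ m then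
        acc ++ [((List.range sizes.length).map
          (fun (g : Nat) => pwsSelect seq labels (g : Int)), inv)]
      else acc) [] = [] := by
    rw [PySem.List.foldl_congr_mem _ _ (fun acc _ => acc) _ ?_]
    · exact PySem.List.foldl_ignore _ _
    · intro acc l _
      show (if pwsInversions l ≤ m then _ else acc) = acc
      rw [if_neg (by have := pwsInversions_nonneg l; omega)]
  rw [hA, hB]

-- ===== VERDICT (by name: the statement is the Claim_ definition above) =====
theorem partitions_with_swaps_spec : Claim_equal_partitions_with_swaps := by
  intro seq sizes m _ hpre
  unfold Spec_partitions_with_swaps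
  rcases hpre with ⟨h1, hm | hsz⟩
  · exact pws_main_neg seq sizes m h1 hm
  · exact pws_main seq sizes m h1 hsz
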